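-- pv_equiv track=rewrite | github.com/mmakaay/adventofcode2024 | 21_Keypad_Conundrum/part1.py | build_keypad_specs
-- ===== SOURCE A (Python) =====
-- from itertools import product
-- from heapq import heappush, heappop
--
-- def build_keypad_specs(keypad):
--     """Builds a mapping for (keyA, keyB) to a list of all possible navigation
--     steps from keyA to keyB that take the least amount of steps."""
--
--     key2position = {
--         key: (x, y)
--         for y, row in enumerate(keypad)
--         for x, key in enumerate(row)
--     }
--
--     position2key = {position: key for key, position in key2position.items()}
--
--     def get_best_navigation_options(start_key, finish_key):
--         queue = []
--         start = key2position[start_key]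
--         heappush(queue, (0, *start, []))
--         minimal_length = float("inf")
--         while queue:
--             length, x, y, route = heappop(queue)
--             length += 1
--
--             # Skip position if it is not a best route candidate.
--             if length > minimal_length:
--                 continue
--
--             # Route found! The first time we get here, we found the best
--             # route in terms of the number of steps. Any other route candidates
--             # must have the same amount of steps.
--             if position2key[(x, y)] == finish_key:
--                 minimal_length = length
--                 yield route
--                 continue
--
--             for dx, dy in ((0, -1), (1, 0), (0, 1), (-1, 0)):
--                 x2, y2 = x + dx, y + dy
--                 if (x2, y2) in position2key and position2key[(x2, y2)] != " ":
--                     heappush(queue, (length, x2, y2, route + [(dx, dy)]))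
--
--     navigation_options = {}
--     key_names = list(key2position.keys())
--     for start_key, finish_key in product(key_names, key_names):
--         if start_key != " " and finish_key != " ":
--             best_navigation_options = list(get_best_navigation_options(start_key, finish_key))
--             navigation_options[(start_key, finish_key)] = best_navigation_options
--
--     return navigation_options
-- ===== SOURCE B (Python) =====
-- def build_keypad_specs(keypad):
--     """Builds a mapping for (keyA, keyB) to a list of all possible navigation
--     steps from keyA to keyB that take the least amount of steps.
--
--     Iterative-deepening enumeration: for each pair, try route lengths
--     0, 1, 2, ... and collect every valid route of the first length that
--     reaches the finish key; routes are produced by a depth-first walk and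
--     finally ordered by (finish position, route)."""
--
--     pos_of = {
--         key: (x, y)
--         for y, row in enumerate(keypad)
--         for x, key in enumerate(row)
--     }
--     grid = {pos: key for key, pos in pos_of.items()}
--     DIRS = ((-1, 0), (0, -1), (0, 1), (1, 0))
--
--     def walks(p, finish, depth):
--         # all (end, route) with exactly `depth` valid steps from p that touch
--         # `finish` only at the very end
--         if grid[p] == finish:
--             return [(p, [])] if depth == 0 else []
--         if depth == 0:
--             return []
--         found = []
--         for dx, dy in DIRS:
--             q = (p[0] + dx, p[1] + dy)
--             if q in grid and grid[q] != ' ':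
--                 for end, rest in walks(q, finish, depth - 1):
--                     found.append((end, [(dx, dy)] + rest))
--         return found
--
--     def shortest_routes(start_key, finish_key):
--         # a shortest route never visits a cell twice, so its length is < len(grid)
--         for depth in range(len(grid) + 1):
--             found = walks(pos_of[start_key], finish_key, depth)
--             if found:
--                 return [route for _, route in sorted(found)]
--         return []
--
--     keys = [key for key in pos_of if key != ' ']
--     return {(s, f): shortest_routes(s, f) for s in keys for f in keys}
-- ===== Notes on version B (the rewrite author's own statement) =====
-- stated objective: alternative
-- what changed: A runs a heap-based best-first search per key pair, lazily pruning with a running minimal length; B replaces it by iterative-deepening depth-first enumeration: it tries route lengths 0,1,2,... (capped by the number of keys, which also makes B total where A loops forever) and collects every valid route of the first successful length, sorting the survivors by (finish position, route) to match the heap's emission order.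
import Mathlib
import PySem

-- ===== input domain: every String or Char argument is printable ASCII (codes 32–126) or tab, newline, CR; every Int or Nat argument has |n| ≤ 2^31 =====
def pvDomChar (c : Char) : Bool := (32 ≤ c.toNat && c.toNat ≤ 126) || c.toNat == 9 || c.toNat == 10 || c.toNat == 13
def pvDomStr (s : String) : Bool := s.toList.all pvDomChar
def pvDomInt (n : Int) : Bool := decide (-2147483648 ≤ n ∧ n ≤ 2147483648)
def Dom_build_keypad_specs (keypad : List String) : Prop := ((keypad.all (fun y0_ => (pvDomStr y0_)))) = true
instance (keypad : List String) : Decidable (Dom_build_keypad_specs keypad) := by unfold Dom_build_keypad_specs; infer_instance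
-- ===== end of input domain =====

-- One honest line: B replaces A's per-pair heap-based best-first search by bounded
-- iterative-deepening DFS enumeration of the shortest routes (sorted at the end to the
-- same order); equivalence is proved on Pre_, exactly the inputs where Python A terminates.

-- ---- shared preprocessing helpers (the identical Python dict comprehensions of both programs) ----

-- the grid cells in Python's enumerate order; keys are 1-char strings
def pvCells (keypad : List String) : List ((Int × Int) × String) :=
  keypad.zipIdx.flatMap (fun ry =>
    ry.1.toList.zipIdx.map (fun cx => (((cx.2 : Int), (ry.2 : Int)), String.ofList [cx.1])))

-- key2position / pos_of : {key: (x, y) ...} (last occurrence wins)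
def pvK2P (keypad : List String) : PySem.Dict String (Int × Int) :=
  (pvCells keypad).foldl (fun d pk => d.insert pk.2 pk.1) PySem.Dict.empty

-- position2key / grid : {position: key ...}
def pvP2K (keypad : List String) : PySem.Dict (Int × Int) String :=
  (pvK2P keypad).items.foldl (fun d kp => d.insert kp.2 kp.1) PySem.Dict.empty

-- ===== PORT A =====

-- heap entries (length, x, y, route), compared as Python compares these tuples:
-- lexicographically, with the route lists themselves compared lexicographically
abbrev PVE := Int × Int × Int × List (Int × Int)

def pvCmpPair (p q : Int × Int) : Ordering := (compare p.1 q.1).then (compare p.2 q.2)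

def pvCmpRoute : List (Int × Int) → List (Int × Int) → Ordering
  | [], [] => .eq
  | [], _ :: _ => .lt
  | _ :: _, [] => .gt
  | p :: r, q :: s => (pvCmpPair p q).then (pvCmpRoute r s)

def pvCmpE : PVE → PVE → Ordering := fun e f =>
  (((compare e.1 f.1).then (compare e.2.1 f.2.1)).then (compare e.2.2.1 f.2.2.1)).then
    (pvCmpRoute e.2.2.2 f.2.2.2)

-- heappush/heappop: all entries ever in A's heap are pairwise distinct, so the pop
-- order is exactly ascending tuple order; exact port as insertion into a sorted list
-- (pop = take the head).
def pvPush (e : PVE) (q : List PVE) : List PVE :=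
  PySem.List.insertBy (fun a b => pvCmpE a b = .lt) e q

-- the while-queue loop of get_best_navigation_options; fuel only totalizes the
-- recursion (Python's loop does not terminate on inputs excluded by Pre_)
def pvLoopA (p2k : PySem.Dict (Int × Int) String) (finish : String) :
    Nat → List PVE → Option Int → List (List (Int × Int)) → List (List (Int × Int))
  | 0, _, _, out => out
  | _ + 1, [], _, out => out
  | fuel + 1, e :: q, m, out =>
      let length := e.1 + 1
      if (match m with | some mv => decide (mv < length) | none => false) then
        pvLoopA p2k finish fuel q m out
      else if p2k.get? (e.2.1, e.2.2.1) = some finish then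
        pvLoopA p2k finish fuel q (some length) (out ++ [e.2.2.2])
      else
        pvLoopA p2k finish fuel
          ([((0 : Int), (-1 : Int)), (1, 0), (0, 1), (-1, 0)].foldl (fun acc d =>
              let x2 := e.2.1 + d.1
              let y2 := e.2.2.1 + d.2
              match p2k.get? (x2, y2) with
              | some k => if k ≠ " " then pvPush (length, x2, y2, e.2.2.2 ++ [d]) acc else acc
              | none => acc) q)
          m out

-- list(get_best_navigation_options(start_key, finish_key)); key2position[start_key]
-- always succeeds (start_key is one of its keys): the none branch is unreachable
def pvBestA (keypad : List String) (start_key finish_key : String) : List (List (Int × Int)) :=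
  match (pvK2P keypad).get? start_key with
  | some start =>
      pvLoopA (pvP2K keypad) finish_key (4 ^ ((pvP2K keypad).size + 2))
        [((0 : Int), start.1, start.2, [])] none []
  | none => []

def build_keypad_specs (keypad : List String) : List (String × String × List (List (Int × Int))) :=
  let key_names := (pvK2P keypad).keys
  let nav := key_names.foldl (fun d s =>
      key_names.foldl (fun d f =>
        if s ≠ " " ∧ f ≠ " " then d.insert (s, f) (pvBestA keypad s f) else d) d)
    PySem.Dict.empty
  -- the returned dict of tuple keys, re-associated to the required triple type
  nav.items.map (fun x => (x.1.1, x.1.2, x.2))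

-- ===== PORT B =====

-- Python tuple order on the collected (end_position, route) pairs
def pvPairLt (a b : (Int × Int) × List (Int × Int)) : Bool :=
  pvCmpE (0, a.1.1, a.1.2, a.2) (0, b.1.1, b.1.2, b.2) = .lt

-- sorted(found): the pairs are pairwise distinct, so a stable insertion sort by the
-- strict tuple order is exact
def pvSortPairs (l : List ((Int × Int) × List (Int × Int))) : List ((Int × Int) × List (Int × Int)) :=
  l.foldl (fun acc x => PySem.List.insertBy pvPairLt x acc) []

-- walks(p, finish, depth): grid[p] is always present when called (comment in Source B)
def pvWalksB (grid : PySem.Dict (Int × Int) String) (finish : String) :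
    Nat → (Int × Int) → List ((Int × Int) × List (Int × Int))
  | depth, p =>
      if grid.get? p = some finish then
        (match depth with | 0 => [(p, [])] | _ + 1 => [])
      else
        match depth with
        | 0 => []
        | d + 1 =>
            [((-1 : Int), (0 : Int)), (0, -1), (0, 1), (1, 0)].foldl (fun found dir =>
              let q := (p.1 + dir.1, p.2 + dir.2)
              match grid.get? q with
              | some k =>
                  if k ≠ " " then
                    found ++ (pvWalksB grid finish d q).map (fun er => (er.1, dir :: er.2))
                  else found
              | none => found) []

-- the `for depth in range(len(grid) + 1)` loop with its early return
def pvDeepB (grid : PySem.Dict (Int × Int) String) (finish : String) (start : Int × Int) :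
    Nat → Nat → List (List (Int × Int))
  | 0, _ => []
  | k + 1, depth =>
      let found := pvWalksB grid finish depth start
      if found = [] then pvDeepB grid finish start k (depth + 1)
      else (pvSortPairs found).map (fun er => er.2)

def pvBestB (keypad : List String) (start_key finish_key : String) : List (List (Int × Int)) :=
  match (pvK2P keypad).get? start_key with
  | some start => pvDeepB (pvP2K keypad) finish_key start ((pvP2K keypad).size + 1) 0
  | none => []

def build_keypad_specs_alt (keypad : List String) : List (String × String × List (List (Int × Int))) :=
  let keys := (pvK2P keypad).keys.filter (fun k => k ≠ " ")
  let nav := keys.foldl (fun d s =>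
      keys.foldl (fun d f => d.insert (s, f) (pvBestB keypad s f)) d)
    PySem.Dict.empty
  nav.items.map (fun x => (x.1.1, x.1.2, x.2))

-- ===== PRECONDITION & SPEC =====

def pvDirsA : List (Int × Int) := [(0, -1), (1, 0), (0, 1), (-1, 0)]

def pvValid (g : PySem.Dict (Int × Int) String) (q : Int × Int) : Bool :=
  match g.get? q with | some k => k ≠ " " | none => false

-- one breadth step of the reachability closure
def pvStep (g : PySem.Dict (Int × Int) String) (S : List (Int × Int)) : List (Int × Int) :=
  S.foldl (fun acc p =>
    pvDirsA.foldl (fun acc d =>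
      let q := (p.1 + d.1, p.2 + d.2)
      if pvValid g q ∧ q ∉ acc then acc ++ [q] else acc) acc) S

def pvReachN (g : PySem.Dict (Int × Int) String) : Nat → List (Int × Int) → List (Int × Int)
  | 0, S => S
  | n + 1, S => pvReachN g n (pvStep g S)

-- Pre_ holds exactly where Python A terminates: for every ordered pair of non-blank
-- keys, either some cell carrying the finish key is reachable from the start key's
-- cell through non-blank grid cells, or the start cell has no valid neighbour at all
-- (then A's queue empties and A returns [] for the pair).  On every other input A's
-- heap grows forever and A never returns, so nothing is excluded that A returns on.
def Pre_build_keypad_specs (keypad : List String) : Prop :=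
  ∀ s ∈ (pvK2P keypad).keys, s ≠ " " → ∀ f ∈ (pvK2P keypad).keys, f ≠ " " →
    ∀ p, (pvK2P keypad).get? s = some p →
      ((pvReachN (pvP2K keypad) ((pvP2K keypad).size) [p]).any
          (fun q => (pvP2K keypad).get? q = some f))
      ∨ (∀ d ∈ pvDirsA, ¬ pvValid (pvP2K keypad) (p.1 + d.1, p.2 + d.2))

instance (keypad : List String) : Decidable (Pre_build_keypad_specs keypad) := by
  unfold Pre_build_keypad_specs; infer_instance

def pvWitness_build_keypad_specs : List String := ["01"]

def Spec_build_keypad_specs (keypad : List String) (out : List (String × String × List (List (Int × Int)))) : Prop := out = build_keypad_specs_alt keypad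
instance (keypad : List String) (out : List (String × String × List (List (Int × Int)))) : Decidable (Spec_build_keypad_specs keypad out) := by unfold Spec_build_keypad_specs; infer_instance

-- ===== CLAIM (what is proved, stated in full; the proofs are below) =====
def Claim_equal_build_keypad_specs : Prop := ∀ (keypad : List String), Dom_build_keypad_specs keypad → Pre_build_keypad_specs keypad → Spec_build_keypad_specs keypad (build_keypad_specs keypad)

-- ===== LEMMAS AND PROOFS =====

-- ---- walk vocabulary (proof-side only) ----

def pvAdd (p d : Int × Int) : Int × Int := (p.1 + d.1, p.2 + d.2)

def pvEnd (start : Int × Int) (r : List (Int × Int)) : Int × Int := r.foldl pvAdd start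

def pvOk (g : PySem.Dict (Int × Int) String) : (Int × Int) → List (Int × Int) → Bool
  | _, [] => true
  | p, d :: r => pvValid g (pvAdd p d) && pvOk g (pvAdd p d) r

def pvNF (g : PySem.Dict (Int × Int) String) (fk : String) : (Int × Int) → List (Int × Int) → Bool
  | _, [] => true
  | p, d :: r => !(g.get? p == some fk) && pvNF g fk (pvAdd p d) r

def pvDirLst (r : List (Int × Int)) : Bool := r.all (fun d => decide (d ∈ pvDirsA))

-- finish walk: all steps valid, touches the finish key exactly at the end
def pvFWb (g : PySem.Dict (Int × Int) String) (fk : String) (start : Int × Int)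
    (r : List (Int × Int)) : Bool :=
  pvDirLst r && pvOk g start r && pvNF g fk start r && (g.get? (pvEnd start r) == some fk)

-- what A's heap can ever contain, for minimal finish length dd
def pvPushb (g : PySem.Dict (Int × Int) String) (fk : String) (start : Int × Int)
    (dd : Nat) (r : List (Int × Int)) : Bool :=
  pvDirLst r && pvOk g start r && pvNF g fk start r && (r.length ≤ dd + 1)

def pvFWdb (g : PySem.Dict (Int × Int) String) (fk : String) (start : Int × Int)
    (dd : Nat) (r : List (Int × Int)) : Bool :=
  pvFWb g fk start r && (r.length == dd)

def pvEnt (start : Int × Int) (r : List (Int × Int)) : PVE :=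
  ((r.length : Int), (pvEnd start r).1, (pvEnd start r).2, r)

def pvLtE (e f : PVE) : Prop := pvCmpE e f = .lt

def pvLtW (start : Int × Int) (r s : List (Int × Int)) : Prop := pvLtE (pvEnt start r) (pvEnt start s)

-- ---- comparator laws ----

theorem pvCmpPair_eq_iff (p q : Int × Int) : pvCmpPair p q = .eq ↔ p = q := by
  simp [pvCmpPair, Ordering.then_eq_eq, compare_eq_iff_eq, Prod.ext_iff]

theorem pvCmpPair_swap (p q : Int × Int) : pvCmpPair q p = (pvCmpPair p q).swap := by
  simp only [pvCmpPair, Ordering.swap_then]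
  rw [Int.compare_swap, Int.compare_swap]

theorem pvCmpPair_trans {p q t : Int × Int} (h1 : pvCmpPair p q = .lt) (h2 : pvCmpPair q t = .lt) :
    pvCmpPair p t = .lt := by
  simp only [pvCmpPair, Ordering.then_eq_lt, Ordering.then_eq_eq, compare_lt_iff_lt,
    compare_eq_iff_eq] at h1 h2 ⊢
  omega

theorem pvCmpRoute_eq_iff : ∀ (a b : List (Int × Int)), pvCmpRoute a b = .eq ↔ a = b
  | [], [] => by simp [pvCmpRoute]
  | [], _ :: _ => by simp [pvCmpRoute]
  | _ :: _, [] => by simp [pvCmpRoute]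
  | p :: r, q :: s => by
      simp [pvCmpRoute, Ordering.then_eq_eq, pvCmpPair_eq_iff, pvCmpRoute_eq_iff r s]

theorem pvCmpRoute_swap : ∀ (a b : List (Int × Int)), pvCmpRoute b a = (pvCmpRoute a b).swap
  | [], [] => by simp [pvCmpRoute, Ordering.swap]
  | [], _ :: _ => by simp [pvCmpRoute, Ordering.swap]
  | _ :: _, [] => by simp [pvCmpRoute, Ordering.swap]
  | p :: r, q :: s => by
      simp only [pvCmpRoute, Ordering.swap_then]
      rw [pvCmpPair_swap p q, pvCmpRoute_swap r s]

theorem pvCmpRoute_trans : ∀ {a b c : List (Int × Int)}, pvCmpRoute a b = .lt →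
    pvCmpRoute b c = .lt → pvCmpRoute a c = .lt
  | [], [], _, _, h2 => h2
  | [], _ :: _, [], _, h2 => by cases h2
  | [], _ :: _, _ :: _, _, _ => by simp [pvCmpRoute]
  | _ :: _, [], _, h1, _ => by cases h1
  | _ :: _, _ :: _, [], _, h2 => by cases h2
  | p :: r, q :: s, t :: u, h1, h2 => by
      simp only [pvCmpRoute, Ordering.then_eq_lt] at h1 h2 ⊢
      rcases h1 with h1 | ⟨h1e, h1r⟩
      · rcases h2 with h2 | ⟨h2e, h2r⟩
        · exact Or.inl (pvCmpPair_trans h1 h2)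
        · rw [pvCmpPair_eq_iff] at h2e; subst h2e; exact Or.inl h1
      · rw [pvCmpPair_eq_iff] at h1e; subst h1e
        rcases h2 with h2 | ⟨h2e, h2r⟩
        · exact Or.inl h2
        · exact Or.inr ⟨h2e, pvCmpRoute_trans h1r h2r⟩

theorem pvCmpE_eq_iff (e f : PVE) : pvCmpE e f = .eq ↔ e = f := by
  rcases e with ⟨a1, a2, a3, a4⟩; rcases f with ⟨b1, b2, b3, b4⟩
  simp [pvCmpE, Ordering.then_eq_eq, compare_eq_iff_eq, pvCmpRoute_eq_iff]
  tauto

theorem pvCmpE_swap (e f : PVE) : pvCmpE f e = (pvCmpE e f).swap := by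
  rcases e with ⟨a1, a2, a3, a4⟩; rcases f with ⟨b1, b2, b3, b4⟩
  simp only [pvCmpE, Ordering.swap_then]
  rw [Int.compare_swap, Int.compare_swap, Int.compare_swap, ← pvCmpRoute_swap a4 b4]

theorem pvCmpE_trans {e f h : PVE} (h1 : pvCmpE e f = .lt) (h2 : pvCmpE f h = .lt) :
    pvCmpE e h = .lt := by
  rcases e with ⟨a1, a2, a3, a4⟩; rcases f with ⟨b1, b2, b3, b4⟩; rcases h with ⟨c1, c2, c3, c4⟩
  simp only [pvCmpE, Ordering.then_eq_lt, Ordering.then_eq_eq, compare_lt_iff_lt,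
    compare_eq_iff_eq] at h1 h2 ⊢
  rcases h1 with (⟨h1 | ⟨e1, h1⟩⟩ | ⟨⟨e1, e2⟩, h1⟩) | ⟨⟨⟨e1, e2⟩, e3⟩, h1⟩ <;>
    rcases h2 with (⟨f1 | ⟨f1, f2⟩⟩ | ⟨⟨f1, f2⟩, f3⟩) | ⟨⟨⟨f1, f2⟩, f3⟩, f4⟩ <;>
    subst_vars <;>
    first
      | (left; left; left; omega)
      | (left; left; right; exact ⟨by omega, by omega⟩)
      | (left; right; exact ⟨⟨by omega, by omega⟩, by omega⟩)
      | (right; exact ⟨⟨⟨rfl, rfl⟩, rfl⟩, pvCmpRoute_trans h1 f4⟩)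

theorem pvLtE_irrefl (e : PVE) : ¬ pvLtE e e := by
  have := pvCmpE_eq_iff e e
  simp only [pvLtE]; intro h; rw [h] at this; simp at this

theorem pvLtE_asymm {e f : PVE} (h : pvLtE e f) : ¬ pvLtE f e := by
  unfold pvLtE at *; rw [pvCmpE_swap, h]; simp [Ordering.swap]

theorem pvLtE_total {e f : PVE} (h : e ≠ f) : pvLtE e f ∨ pvLtE f e := by
  unfold pvLtE
  rcases h3 : pvCmpE e f with _ | _ | _
  · exact Or.inl rfl
  · exact absurd ((pvCmpE_eq_iff e f).1 h3) h
  · right; rw [pvCmpE_swap, h3]; rfl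

theorem pvEnt_inj {start : Int × Int} {r s : List (Int × Int)} (h : pvEnt start r = pvEnt start s) :
    r = s := by
  simpa [pvEnt] using congrArg (fun e => e.2.2.2) h

theorem pvLtW_irrefl (start : Int × Int) (r : List (Int × Int)) : ¬ pvLtW start r r :=
  pvLtE_irrefl _

theorem pvLtW_asymm {start : Int × Int} {r s : List (Int × Int)} (h : pvLtW start r s) :
    ¬ pvLtW start s r := pvLtE_asymm h

theorem pvLtW_total {start : Int × Int} {r s : List (Int × Int)} (h : r ≠ s) :
    pvLtW start r s ∨ pvLtW start s r :=
  pvLtE_total (fun he => h (pvEnt_inj he))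

theorem pvLtW_of_length_lt {start : Int × Int} {r s : List (Int × Int)}
    (h : r.length < s.length) : pvLtW start r s := by
  simp only [pvLtW, pvLtE, pvEnt, pvCmpE, Ordering.then_eq_lt, compare_lt_iff_lt]
  left; left; left; exact_mod_cast h

theorem pvLtW_length_le {start : Int × Int} {r s : List (Int × Int)} (h : pvLtW start r s) :
    r.length ≤ s.length := by
  simp only [pvLtW, pvLtE, pvEnt, pvCmpE, Ordering.then_eq_lt, Ordering.then_eq_eq,
    compare_lt_iff_lt, compare_eq_iff_eq] at h
  rcases h with ((h | ⟨h, -⟩) | ⟨⟨h, -⟩, -⟩) | ⟨⟨⟨h, -⟩, -⟩, -⟩ <;> omega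



-- ---- insertion into a sorted list (shared by A's queue and B's sorted()) ----

theorem pvInsertBy_perm {α : Type} (lt : α → α → Bool) (x : α) (l : List α) :
    (PySem.List.insertBy lt x l).Perm (x :: l) := by
  induction l with
  | nil => exact List.Perm.refl _
  | cons y ys ih =>
      show (if lt x y = true then x :: y :: ys else y :: PySem.List.insertBy lt x ys).Perm _
      split_ifs
      · exact List.Perm.refl _
      · exact (List.Perm.cons y ih).trans (List.Perm.swap x y ys)

theorem pvInsertBy_pairwise {α : Type} (lt : α → α → Bool)
    (htot : ∀ a b : α, a ≠ b → lt a b = true ∨ lt b a = true)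
    (htr : ∀ a b c : α, lt a b = true → lt b c = true → lt a c = true)
    (x : α) (l : List α) (hl : l.Pairwise (fun a b => lt a b = true)) (hx : x ∉ l) :
    (PySem.List.insertBy lt x l).Pairwise (fun a b => lt a b = true) := by
  induction l with
  | nil => simp [PySem.List.insertBy]
  | cons y ys ih =>
      rcases List.pairwise_cons.1 hl with ⟨hy, hys⟩
      show (if lt x y = true then x :: y :: ys else y :: PySem.List.insertBy lt x ys).Pairwise _
      split_ifs with hxy
      · refine List.pairwise_cons.2 ⟨?_, hl⟩
        intro b hb
        rcases List.mem_cons.1 hb with rfl | hb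
        · exact hxy
        · exact htr x y b hxy (hy _ hb)
      · have hne : x ≠ y := fun he => hx (he ▸ List.mem_cons_self)
        have hyx : lt y x = true := (htot x y hne).resolve_left (by simpa using hxy)
        refine List.pairwise_cons.2 ⟨?_, ih hys (fun hm => hx (List.mem_cons_of_mem _ hm))⟩
        intro b hb
        rcases (PySem.List.mem_insertBy lt x b ys).1 hb with rfl | hb
        · exact hyx
        · exact hy _ hb

theorem pvSortFold_perm {α : Type} (lt : α → α → Bool) :
    ∀ (l acc : List α), (l.foldl (fun acc x => PySem.List.insertBy lt x acc) acc).Perm (acc ++ l)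
  | [], acc => by simp
  | x :: l, acc => by
      refine (pvSortFold_perm lt l (PySem.List.insertBy lt x acc)).trans ?_
      have h1 : (PySem.List.insertBy lt x acc ++ l).Perm ((x :: acc) ++ l) :=
        (pvInsertBy_perm lt x acc).append_right l
      refine h1.trans ?_
      simpa using (List.perm_middle (a := x) (l₁ := acc) (l₂ := l)).symm

theorem pvSortFold_pairwise {α : Type} (lt : α → α → Bool)
    (htot : ∀ a b : α, a ≠ b → lt a b = true ∨ lt b a = true)
    (htr : ∀ a b c : α, lt a b = true → lt b c = true → lt a c = true) :
    ∀ (l acc : List α), l.Nodup → acc.Pairwise (fun a b => lt a b = true) →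
      (∀ x ∈ l, x ∉ acc) →
      (l.foldl (fun acc x => PySem.List.insertBy lt x acc) acc).Pairwise (fun a b => lt a b = true)
  | [], acc, _, hacc, _ => hacc
  | x :: l, acc, hnd, hacc, hdisj => by
      have hx : x ∉ acc := hdisj x List.mem_cons_self
      refine pvSortFold_pairwise lt htot htr l _ hnd.of_cons
        (pvInsertBy_pairwise lt htot htr x acc hacc hx) ?_
      intro y hy hmem
      rcases (PySem.List.mem_insertBy lt x y acc).1 hmem with rfl | hmem
      · exact (List.nodup_cons.1 hnd).1 hy
      · exact hdisj y (List.mem_cons_of_mem _ hy) hmem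

-- ---- walk structure ----

theorem pvEnd_append (start : Int × Int) (a b : List (Int × Int)) :
    pvEnd start (a ++ b) = pvEnd (pvEnd start a) b := List.foldl_append

theorem pvOk_append (g : PySem.Dict (Int × Int) String) :
    ∀ (a b : List (Int × Int)) (p : Int × Int),
      pvOk g p (a ++ b) = (pvOk g p a && pvOk g (pvEnd p a) b)
  | [], b, p => by simp [pvOk, pvEnd]
  | d :: a, b, p => by
      simp [pvOk, pvOk_append g a b (pvAdd p d), pvEnd, Bool.and_assoc]

theorem pvNF_append (g : PySem.Dict (Int × Int) String) (fk : String) :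
    ∀ (a b : List (Int × Int)) (p : Int × Int),
      pvNF g fk p (a ++ b) = (pvNF g fk p a && pvNF g fk (pvEnd p a) b)
  | [], b, p => by simp [pvNF, pvEnd]
  | d :: a, b, p => by
      simp [pvNF, pvNF_append g fk a b (pvAdd p d), pvEnd, Bool.and_assoc]

theorem pvProperPrefix_decomp {α : Type} {a b : List α} (h : a <+: b) (hne : a ≠ b) :
    ∃ d r, b = a ++ d :: r := by
  obtain ⟨t, rfl⟩ := h
  cases t with
  | nil => simp at hne
  | cons d r => exact ⟨d, r, rfl⟩

-- a walk that avoids the finish key strictly before its end has no proper prefix ending there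
theorem pvNF_no_mid (g : PySem.Dict (Int × Int) String) (fk : String) (start : Int × Int)
    {q r : List (Int × Int)} (hnf : pvNF g fk start r = true) (hpre : q <+: r) (hne : q ≠ r) :
    g.get? (pvEnd start q) ≠ some fk := by
  obtain ⟨d, rest, rfl⟩ := pvProperPrefix_decomp hpre hne
  rw [pvNF_append] at hnf
  rw [Bool.and_eq_true] at hnf
  have h2 := hnf.2
  simp only [pvNF, Bool.and_eq_true] at h2
  simpa using h2.1

-- ---- the enumeration of all direction lists ----

def pvDirLists : Nat → List (List (Int × Int))
  | 0 => [[]]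
  | n + 1 => pvDirsA.flatMap (fun d => (pvDirLists n).map (d :: ·))

theorem mem_pvDirLists : ∀ (n : Nat) (r : List (Int × Int)),
    r ∈ pvDirLists n ↔ r.length = n ∧ pvDirLst r = true
  | 0, r => by
      constructor
      · intro h; simp [pvDirLists] at h; subst h; simp [pvDirLst]
      · intro ⟨h1, _⟩; rw [List.length_eq_zero_iff] at h1; subst h1; simp [pvDirLists]
  | n + 1, r => by
      simp only [pvDirLists, List.mem_flatMap, List.mem_map]
      constructor
      · rintro ⟨d, hd, s, hs, rfl⟩
        rcases (mem_pvDirLists n s).1 hs with ⟨hl, hdl⟩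
        refine ⟨by simp [hl], ?_⟩
        simp [pvDirLst] at hdl ⊢
        exact ⟨hd, hdl⟩
      · rintro ⟨h1, h2⟩
        cases r with
        | nil => simp at h1
        | cons d s =>
            simp [pvDirLst] at h2
            exact ⟨d, h2.1, s, (mem_pvDirLists n s).2 ⟨by simpa using h1, by
              simp [pvDirLst]; exact h2.2⟩, rfl⟩

theorem nodup_pvDirLists : ∀ n : Nat, (pvDirLists n).Nodup
  | 0 => by simp [pvDirLists]
  | n + 1 => by
      rw [pvDirLists, List.nodup_flatMap]
      refine ⟨fun d _ => (nodup_pvDirLists n).map (fun a b h => by simpa using h), ?_⟩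
      have hdis : ∀ d1 d2 : Int × Int, d1 ≠ d2 →
          List.Disjoint ((pvDirLists n).map (d1 :: ·)) ((pvDirLists n).map (d2 :: ·)) := by
        intro d1 d2 hne x h1 h2
        rcases List.mem_map.1 h1 with ⟨s, -, rfl⟩
        rcases List.mem_map.1 h2 with ⟨t, -, ht⟩
        exact hne (by injection ht with h _; exact h.symm)
      show List.Pairwise _ [(0, -1), (1, 0), (0, 1), (-1, 0)]
      simp only [List.pairwise_cons, List.mem_cons, List.not_mem_nil]
      refine ⟨?_, ?_, ?_, fun a h => absurd h (by simp), List.Pairwise.nil⟩ <;> intro a ha <;>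
        rcases ha with rfl | rfl | rfl | h <;> first
          | exact hdis _ _ (by decide)
          | simp_all

def pvUpto (k : Nat) : List (List (Int × Int)) := (List.range k).flatMap pvDirLists

theorem mem_pvUpto (k : Nat) (r : List (Int × Int)) :
    r ∈ pvUpto k ↔ r.length < k ∧ pvDirLst r = true := by
  simp only [pvUpto, List.mem_flatMap, List.mem_range]
  constructor
  · rintro ⟨n, hn, hr⟩
    rcases (mem_pvDirLists n r).1 hr with ⟨rfl, h⟩
    exact ⟨hn, h⟩
  · rintro ⟨h1, h2⟩
    exact ⟨r.length, h1, (mem_pvDirLists _ r).2 ⟨rfl, h2⟩⟩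

theorem nodup_pvUpto (k : Nat) : (pvUpto k).Nodup := by
  rw [pvUpto, List.nodup_flatMap]
  refine ⟨fun n _ => nodup_pvDirLists n, ?_⟩
  refine (List.pairwise_lt_range).imp ?_
  intro m n hmn x h1 h2
  rcases (mem_pvDirLists m x).1 h1 with ⟨he1, -⟩
  rcases (mem_pvDirLists n x).1 h2 with ⟨he2, -⟩
  omega

theorem length_pvDirLists : ∀ n : Nat, (pvDirLists n).length = 4 ^ n
  | 0 => rfl
  | n + 1 => by
      simp [pvDirLists, List.length_flatMap, length_pvDirLists n, pvDirsA]
      ring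

theorem length_pvUpto_le : ∀ k : Nat, (pvUpto k).length ≤ 4 ^ k
  | 0 => by simp [pvUpto]
  | k + 1 => by
      have : pvUpto (k + 1) = pvUpto k ++ pvDirLists k := by
        simp [pvUpto, List.range_succ]
      rw [this, List.length_append, length_pvDirLists k]
      have := length_pvUpto_le k
      have h4 : 4 ^ k + 4 ^ k ≤ 4 ^ (k + 1) := by
        have : 4 ^ (k + 1) = 4 * 4 ^ k := by ring
        omega
      omega


-- ---- facts about pvPush and the A-loop invariant ----

theorem pvLtE_bool_iff (a b : PVE) : (decide (pvCmpE a b = .lt)) = true ↔ pvLtE a b := by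
  simp [pvLtE]

theorem pvPush_pairwise (e : PVE) (q : List PVE) (hq : q.Pairwise pvLtE) (he : e ∉ q) :
    (pvPush e q).Pairwise pvLtE := by
  have h := pvInsertBy_pairwise (fun a b => decide (pvCmpE a b = .lt))
    (fun a b hne => by
      rcases pvLtE_total hne with h | h
      · exact Or.inl (by simpa [pvLtE_bool_iff])
      · exact Or.inr (by simpa [pvLtE_bool_iff]))
    (fun a b c h1 h2 => by
      rw [pvLtE_bool_iff] at *
      exact pvCmpE_trans h1 h2)
    e q (hq.imp (fun h => by simpa [pvLtE_bool_iff])) he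
  exact (List.Pairwise.imp (fun h => by rwa [pvLtE_bool_iff] at h) h : (pvPush e q).Pairwise pvLtE)

theorem pvMem_push (e x : PVE) (q : List PVE) : x ∈ pvPush e q ↔ x = e ∨ x ∈ q :=
  PySem.List.mem_insertBy (fun a b => decide (pvCmpE a b = .lt)) e x q

theorem pvLtW_prefix {start : Int × Int} {q r : List (Int × Int)} (h : q <+: r) (hne : q ≠ r) :
    pvLtW start q r := by
  obtain ⟨d, rest, rfl⟩ := pvProperPrefix_decomp h hne
  apply pvLtW_of_length_lt
  simp

theorem pvPushb_iff (g : PySem.Dict (Int × Int) String) (fk : String) (start : Int × Int)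
    (dd : Nat) (r : List (Int × Int)) :
    pvPushb g fk start dd r = true ↔
      (pvDirLst r = true ∧ pvOk g start r = true ∧ pvNF g fk start r = true ∧ r.length ≤ dd + 1) := by
  simp [pvPushb, Bool.and_assoc, and_assoc]

theorem pvFWb_iff (g : PySem.Dict (Int × Int) String) (fk : String) (start : Int × Int)
    (r : List (Int × Int)) :
    pvFWb g fk start r = true ↔
      (pvDirLst r = true ∧ pvOk g start r = true ∧ pvNF g fk start r = true ∧
        g.get? (pvEnd start r) = some fk) := by
  simp [pvFWb, Bool.and_assoc, and_assoc]

theorem pvFWdb_iff (g : PySem.Dict (Int × Int) String) (fk : String) (start : Int × Int)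
    (dd : Nat) (r : List (Int × Int)) :
    pvFWdb g fk start dd r = true ↔ (pvFWb g fk start r = true ∧ r.length = dd) := by
  simp [pvFWdb]

theorem pvEnt_nil (start : Int × Int) : pvEnt start [] = (0, start.1, start.2, []) := by
  simp [pvEnt, pvEnd]

-- the head of the sorted unpopped list is at the head of the queue
theorem pvHeadQ (start : Int × Int) {u₀ : List (Int × Int)} {U' : List (List (Int × Int))}
    {Q : List PVE}
    (hsort : (u₀ :: U').Pairwise (pvLtW start))
    (hQw : ∀ e ∈ Q, ∃ r ∈ u₀ :: U', e = pvEnt start r)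
    (hQsort : Q.Pairwise pvLtE)
    (hfront : ∀ r ∈ u₀ :: U', ∃ q, q <+: r ∧ pvEnt start q ∈ Q) :
    ∃ Q'', Q = pvEnt start u₀ :: Q'' := by
  obtain ⟨q, hpre, hqQ⟩ := hfront u₀ List.mem_cons_self
  obtain ⟨rq, hrq, heq⟩ := hQw _ hqQ
  have hq_eq : q = rq := pvEnt_inj heq
  subst hq_eq
  -- q ∈ U and q is a prefix of u₀, hence q = u₀
  have hqu : q = u₀ := by
    rcases List.mem_cons.1 hrq with rfl | hmem
    · rfl
    · exfalso
      have h1 : pvLtW start u₀ q := (List.pairwise_cons.1 hsort).1 _ hmem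
      by_cases hne : q = u₀
      · exact pvLtW_irrefl start u₀ (hne ▸ h1)
      · exact pvLtW_asymm h1 (pvLtW_prefix hpre hne)
  subst hqu
  have hu₀Q : pvEnt start q ∈ Q := hqQ
  cases Q with
  | nil => cases hu₀Q
  | cons e₀ Q'' =>
      rcases List.mem_cons.1 hu₀Q with he | hmem
      · exact ⟨Q'', by rw [he]⟩
      · exfalso
        obtain ⟨r₀, hr₀, rfl⟩ := hQw e₀ List.mem_cons_self
        have hlt : pvLtE (pvEnt start r₀) (pvEnt start q) :=
          (List.pairwise_cons.1 hQsort).1 _ hmem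
        rcases List.mem_cons.1 hr₀ with rfl | hr₀'
        · exact pvLtE_irrefl _ hlt
        · exact pvLtW_asymm ((List.pairwise_cons.1 hsort).1 _ hr₀') hlt

-- walks of the remaining queue lie in the remaining unpopped list
theorem pvTailQ (start : Int × Int) {u₀ : List (Int × Int)} {U' : List (List (Int × Int))}
    {Q'' : List PVE}
    (hQw : ∀ e ∈ pvEnt start u₀ :: Q'', ∃ r ∈ u₀ :: U', e = pvEnt start r)
    (hQsort : (pvEnt start u₀ :: Q'').Pairwise pvLtE) :
    ∀ e ∈ Q'', ∃ r ∈ U', e = pvEnt start r := by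
  intro e he
  obtain ⟨r, hr, rfl⟩ := hQw e (List.mem_cons_of_mem _ he)
  rcases List.mem_cons.1 hr with rfl | hr'
  · exact absurd ((List.pairwise_cons.1 hQsort).1 _ he) (pvLtE_irrefl _)
  · exact ⟨r, hr', rfl⟩

-- if the popped walk cannot be extended inside U', the old frontier restricted to the tail works
theorem pvFrontTail (start : Int × Int) {u₀ : List (Int × Int)} {U' : List (List (Int × Int))}
    {Q'' : List PVE}
    (hfront : ∀ r ∈ u₀ :: U', ∃ q, q <+: r ∧ pvEnt start q ∈ pvEnt start u₀ :: Q'')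
    (hnotin : u₀ ∉ U')
    (hnoext : ∀ r ∈ U', ¬ u₀ <+: r) :
    ∀ r ∈ U', ∃ q, q <+: r ∧ pvEnt start q ∈ Q'' := by
  intro r hr
  obtain ⟨q, hpre, hqQ⟩ := hfront r (List.mem_cons_of_mem _ hr)
  rcases List.mem_cons.1 hqQ with he | hm
  · have : q = u₀ := pvEnt_inj he
    subst this
    exact absurd hpre (hnoext r hr)
  · exact ⟨q, hpre, hm⟩

theorem pvNotMemHead {start : Int × Int} {u₀ : List (Int × Int)} {U' : List (List (Int × Int))}
    (hsort : (u₀ :: U').Pairwise (pvLtW start)) : u₀ ∉ U' := fun hm =>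
  pvLtW_irrefl start u₀ ((List.pairwise_cons.1 hsort).1 _ hm)

-- ---- the children fold of A's expand step ----

theorem pvFoldPush (g : PySem.Dict (Int × Int) String) (start : Int × Int)
    (u₀ : List (Int × Int)) :
    ∀ (ds : List (Int × Int)) (acc : List PVE), ds.Nodup →
      acc.Pairwise pvLtE →
      (∀ dd ∈ ds, pvEnt start (u₀ ++ [dd]) ∉ acc) →
      ((ds.foldl (fun acc dd =>
          if pvValid g (pvAdd (pvEnd start u₀) dd) = true then
            pvPush (pvEnt start (u₀ ++ [dd])) acc else acc) acc).Pairwise pvLtE ∧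
       (∀ e, e ∈ (ds.foldl (fun acc dd =>
          if pvValid g (pvAdd (pvEnd start u₀) dd) = true then
            pvPush (pvEnt start (u₀ ++ [dd])) acc else acc) acc) ↔
          e ∈ acc ∨ ∃ dd ∈ ds, pvValid g (pvAdd (pvEnd start u₀) dd) = true ∧
            e = pvEnt start (u₀ ++ [dd])))
  | [], acc, _, hacc, _ => ⟨hacc, by simp⟩
  | dd :: ds, acc, hnd, hacc, hdis => by
      simp only [List.foldl_cons]
      by_cases hv : pvValid g (pvAdd (pvEnd start u₀) dd) = true
      · rw [if_pos hv]
        have hne : pvEnt start (u₀ ++ [dd]) ∉ acc := hdis dd List.mem_cons_self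
        have hstep := pvFoldPush g start u₀ ds (pvPush (pvEnt start (u₀ ++ [dd])) acc)
          hnd.of_cons (pvPush_pairwise _ _ hacc hne) ?_
        · refine ⟨hstep.1, fun e => (hstep.2 e).trans ?_⟩
          rw [pvMem_push]
          constructor
          · rintro ((rfl | he) | ⟨d', hd', hv', rfl⟩)
            · exact Or.inr ⟨dd, List.mem_cons_self, hv, rfl⟩
            · exact Or.inl he
            · exact Or.inr ⟨d', List.mem_cons_of_mem _ hd', hv', rfl⟩
          · rintro (he | ⟨d', hd', hv', rfl⟩)
            · exact Or.inl (Or.inr he)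
            · rcases List.mem_cons.1 hd' with rfl | hd''
              · exact Or.inl (Or.inl rfl)
              · exact Or.inr ⟨d', hd'', hv', rfl⟩
        · intro d' hd' hmem
          rcases (pvMem_push _ _ _).1 hmem with he | hmem'
          · have : d' = dd := by
              have := pvEnt_inj he
              simpa using this
            exact (List.nodup_cons.1 hnd).1 (this ▸ hd')
          · exact hdis d' (List.mem_cons_of_mem _ hd') hmem'
      · rw [if_neg hv]
        have hstep := pvFoldPush g start u₀ ds acc hnd.of_cons hacc
          (fun d' hd' => hdis d' (List.mem_cons_of_mem _ hd'))
        refine ⟨hstep.1, fun e => (hstep.2 e).trans ?_⟩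
        constructor
        · rintro (he | ⟨d', hd', hv', rfl⟩)
          · exact Or.inl he
          · exact Or.inr ⟨d', List.mem_cons_of_mem _ hd', hv', rfl⟩
        · rintro (he | ⟨d', hd', hv', rfl⟩)
          · exact Or.inl he
          · rcases List.mem_cons.1 hd' with rfl | hd''
            · exact absurd hv' hv
            · exact Or.inr ⟨d', hd'', hv', rfl⟩


-- ---- the characterization of A's heap loop ----

-- the statement form of the induction hypothesis on the fuel
def pvIH (g : PySem.Dict (Int × Int) String) (fk : String) (start : Int × Int) (dd f : Nat) : Prop :=
  ∀ (U : List (List (Int × Int))) (Q : List PVE) (m : Option Int)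
    (out : List (List (Int × Int))),
    U.length ≤ f →
    U.Pairwise (pvLtW start) →
    (∀ r ∈ U, pvPushb g fk start dd r = true) →
    (∀ r, pvPushb g fk start dd r = true → r ∉ U → ∀ u ∈ U, pvLtW start r u) →
    (∀ e ∈ Q, ∃ r ∈ U, e = pvEnt start r) →
    Q.Pairwise pvLtE →
    (∀ r ∈ U, ∃ q, q <+: r ∧ pvEnt start q ∈ Q) →
    (∀ r, pvEnt start r ∈ Q → r = [] ∨ r.dropLast ∉ U) →
    ((m = none ∧ ∀ r, pvFWdb g fk start dd r = true → r ∈ U) ∨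
      (m = some ((dd : Int) + 1) ∧ ∃ r, pvFWdb g fk start dd r = true ∧ r ∉ U)) →
    pvLoopA g fk f Q m out = out ++ U.filter (fun r => pvFWdb g fk start dd r)

-- the YIELD step: the popped walk is a minimal finish walk; it is appended to out
theorem pvYieldAux (g : PySem.Dict (Int × Int) String) (fk : String) (start : Int × Int)
    (dd f : Nat) (ih : pvIH g fk start dd f)
    (u₀ : List (Int × Int)) (U' : List (List (Int × Int))) (Q'' : List PVE)
    (out : List (List (Int × Int)))
    (hlen : (u₀ :: U').length ≤ f + 1)
    (hsort : (u₀ :: U').Pairwise (pvLtW start))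
    (hpush : ∀ r ∈ u₀ :: U', pvPushb g fk start dd r = true)
    (hclosed : ∀ r, pvPushb g fk start dd r = true → r ∉ u₀ :: U' → ∀ u ∈ u₀ :: U', pvLtW start r u)
    (hQw : ∀ e ∈ pvEnt start u₀ :: Q'', ∃ r ∈ u₀ :: U', e = pvEnt start r)
    (hQsort : (pvEnt start u₀ :: Q'').Pairwise pvLtE)
    (hfront : ∀ r ∈ u₀ :: U', ∃ q, q <+: r ∧ pvEnt start q ∈ pvEnt start u₀ :: Q'')
    (hpar : ∀ r, pvEnt start r ∈ pvEnt start u₀ :: Q'' → r = [] ∨ r.dropLast ∉ u₀ :: U')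
    (hfin : g.get? (pvEnd start u₀) = some fk)
    (huld : u₀.length = dd) :
    pvLoopA g fk f Q'' (some ((u₀.length : Int) + 1)) (out ++ [u₀]) =
      out ++ (u₀ :: U').filter (fun r => pvFWdb g fk start dd r) := by
  have hnotin : u₀ ∉ U' := pvNotMemHead hsort
  have hpush' : ∀ r ∈ U', pvPushb g fk start dd r = true := fun r hr =>
    hpush r (List.mem_cons_of_mem _ hr)
  have hclosed' : ∀ r, pvPushb g fk start dd r = true → r ∉ U' → ∀ u ∈ U', pvLtW start r u := by
    intro r hr hrU u hu
    by_cases hru : r = u₀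
    · subst hru; exact (List.pairwise_cons.1 hsort).1 _ hu
    · exact hclosed r hr (by simp [hru, hrU]) u (List.mem_cons_of_mem _ hu)
  have hpush₀ := (pvPushb_iff g fk start dd u₀).1 (hpush u₀ List.mem_cons_self)
  have hFW : pvFWb g fk start u₀ = true :=
    (pvFWb_iff g fk start u₀).2 ⟨hpush₀.1, hpush₀.2.1, hpush₀.2.2.1, hfin⟩
  have hnoext : ∀ r ∈ U', ¬ u₀ <+: r := by
    intro r hr hpre
    have hne : u₀ ≠ r := fun he => hnotin (he ▸ hr)
    have hnfr := ((pvPushb_iff g fk start dd r).1 (hpush' r hr)).2.2.1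
    exact pvNF_no_mid g fk start hnfr hpre hne hfin
  have hres := ih U' Q'' (some ((u₀.length : Int) + 1)) (out ++ [u₀]) (by simpa using hlen)
    ((List.pairwise_cons.1 hsort).2) hpush' hclosed' (pvTailQ start hQw hQsort)
    ((List.pairwise_cons.1 hQsort).2) (pvFrontTail start hfront hnotin hnoext)
    (fun r hr => (hpar r (List.mem_cons_of_mem _ hr)).imp id
      (fun h h2 => h (List.mem_cons_of_mem _ h2)))
    (Or.inr ⟨by rw [huld], u₀, (pvFWdb_iff g fk start dd u₀).2 ⟨hFW, huld⟩, hnotin⟩)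
  rw [hres]
  have hyes : pvFWdb g fk start dd u₀ = true := (pvFWdb_iff g fk start dd u₀).2 ⟨hFW, huld⟩
  simp [hyes]

-- the EXPAND step: the popped walk is not at the finish; its valid children are pushed
theorem pvExpandAux (g : PySem.Dict (Int × Int) String) (fk : String) (start : Int × Int)
    (dd f : Nat) (ih : pvIH g fk start dd f)
    (u₀ : List (Int × Int)) (U' : List (List (Int × Int))) (Q'' : List PVE)
    (m : Option Int) (out : List (List (Int × Int)))
    (hlen : (u₀ :: U').length ≤ f + 1)
    (hsort : (u₀ :: U').Pairwise (pvLtW start))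
    (hpush : ∀ r ∈ u₀ :: U', pvPushb g fk start dd r = true)
    (hclosed : ∀ r, pvPushb g fk start dd r = true → r ∉ u₀ :: U' → ∀ u ∈ u₀ :: U', pvLtW start r u)
    (hQw : ∀ e ∈ pvEnt start u₀ :: Q'', ∃ r ∈ u₀ :: U', e = pvEnt start r)
    (hQsort : (pvEnt start u₀ :: Q'').Pairwise pvLtE)
    (hfront : ∀ r ∈ u₀ :: U', ∃ q, q <+: r ∧ pvEnt start q ∈ pvEnt start u₀ :: Q'')
    (hpar : ∀ r, pvEnt start r ∈ pvEnt start u₀ :: Q'' → r = [] ∨ r.dropLast ∉ u₀ :: U')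
    (hm : (m = none ∧ ∀ r, pvFWdb g fk start dd r = true → r ∈ u₀ :: U') ∨
      (m = some ((dd : Int) + 1) ∧ ∃ r, pvFWdb g fk start dd r = true ∧ r ∉ u₀ :: U'))
    (hfin : ¬ g.get? (pvEnd start u₀) = some fk)
    (hbound : u₀.length ≤ dd) :
    pvLoopA g fk f
      ([((0 : Int), (-1 : Int)), (1, 0), (0, 1), (-1, 0)].foldl (fun acc d =>
        let x2 := (pvEnd start u₀).1 + d.1
        let y2 := (pvEnd start u₀).2 + d.2
        match g.get? (x2, y2) with
        | some k => if k ≠ " " then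
            pvPush ((u₀.length : Int) + 1, x2, y2, u₀ ++ [d]) acc else acc
        | none => acc) Q'')
      m out =
      out ++ (u₀ :: U').filter (fun r => pvFWdb g fk start dd r) := by
  have hnotin : u₀ ∉ U' := pvNotMemHead hsort
  have hpush' : ∀ r ∈ U', pvPushb g fk start dd r = true := fun r hr =>
    hpush r (List.mem_cons_of_mem _ hr)
  have hclosed' : ∀ r, pvPushb g fk start dd r = true → r ∉ U' → ∀ u ∈ U', pvLtW start r u := by
    intro r hr hrU u hu
    by_cases hru : r = u₀
    · subst hru; exact (List.pairwise_cons.1 hsort).1 _ hu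
    · exact hclosed r hr (by simp [hru, hrU]) u (List.mem_cons_of_mem _ hu)
  have hpush₀ := (pvPushb_iff g fk start dd u₀).1 (hpush u₀ List.mem_cons_self)
  obtain ⟨hdl₀, hok₀, hnf₀, -⟩ := hpush₀
  have hQw' := pvTailQ start hQw hQsort
  have hQsort' := (List.pairwise_cons.1 hQsort).2
  have hEndC : ∀ d : Int × Int, pvEnd start (u₀ ++ [d]) = pvAdd (pvEnd start u₀) d :=
    fun d => by rw [pvEnd_append]; rfl
  have hEntC : ∀ d : Int × Int,
      pvEnt start (u₀ ++ [d]) =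
        ((u₀.length : Int) + 1, (pvEnd start u₀).1 + d.1, (pvEnd start u₀).2 + d.2, u₀ ++ [d]) := by
    intro d
    simp only [pvEnt, hEndC, pvAdd, List.length_append, List.length_cons, List.length_nil]
    push_cast
    ring_nf
  have hbody : ∀ (acc : List PVE) (d : Int × Int),
      (let x2 := (pvEnd start u₀).1 + d.1
       let y2 := (pvEnd start u₀).2 + d.2
       match g.get? (x2, y2) with
       | some k => if k ≠ " " then
            pvPush ((u₀.length : Int) + 1, x2, y2, u₀ ++ [d]) acc else acc
       | none => acc) =
      (if pvValid g (pvAdd (pvEnd start u₀) d) = true then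
        pvPush (pvEnt start (u₀ ++ [d])) acc else acc) := by
    intro acc d
    rw [hEntC d]
    show (match g.get? (pvAdd (pvEnd start u₀) d) with
       | some k => if k ≠ " " then
            pvPush ((u₀.length : Int) + 1, (pvEnd start u₀).1 + d.1,
              (pvEnd start u₀).2 + d.2, u₀ ++ [d]) acc else acc
       | none => acc) = _
    cases hk : g.get? (pvAdd (pvEnd start u₀) d) with
    | none => simp [pvValid, hk]
    | some k =>
        by_cases hks : k = " "
        · subst hks; simp [pvValid, hk]
        · simp [pvValid, hk, hks]
  rw [PySem.List.foldl_congr_mem _ _ _ _ (fun acc x _ => hbody acc x)]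
  have hdis : ∀ dd' ∈ [((0 : Int), (-1 : Int)), (1, 0), (0, 1), (-1, 0)],
      pvEnt start (u₀ ++ [dd']) ∉ Q'' := by
    intro dd' _ hmem
    rcases hpar (u₀ ++ [dd']) (List.mem_cons_of_mem _ hmem) with he | hdl
    · simp at he
    · rw [List.dropLast_concat] at hdl
      exact hdl List.mem_cons_self
  obtain ⟨hQnsort, hQnmem⟩ := pvFoldPush g start u₀
    [((0 : Int), (-1 : Int)), (1, 0), (0, 1), (-1, 0)] Q'' (by decide) hQsort' hdis
  have hchildP : ∀ dd' : Int × Int, dd' ∈ pvDirsA →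
      pvValid g (pvAdd (pvEnd start u₀) dd') = true →
      pvPushb g fk start dd (u₀ ++ [dd']) = true := by
    intro dd' hdd hv
    rw [pvPushb_iff]
    refine ⟨?_, ?_, ?_, by simp; omega⟩
    · simp only [pvDirLst, List.all_append, Bool.and_eq_true]
      refine ⟨hdl₀, ?_⟩
      simp [hdd]
    · rw [pvOk_append, hok₀]
      simp [pvOk, hv]
    · rw [pvNF_append, hnf₀]
      simp [pvNF]
      simpa using hfin
  have hchildU : ∀ dd' : Int × Int, dd' ∈ pvDirsA →
      pvValid g (pvAdd (pvEnd start u₀) dd') = true → (u₀ ++ [dd']) ∈ U' := by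
    intro dd' hdd hv
    have hcp := hchildP dd' hdd hv
    have hmemU : (u₀ ++ [dd']) ∈ u₀ :: U' := by
      by_contra hno
      have := hclosed _ hcp hno u₀ List.mem_cons_self
      exact pvLtW_asymm (pvLtW_of_length_lt (by simp)) this
    rcases List.mem_cons.1 hmemU with he | h
    · exact absurd (congrArg List.length he.symm) (by simp)
    · exact h
  have hres := ih U'
    ([((0 : Int), (-1 : Int)), (1, 0), (0, 1), (-1, 0)].foldl (fun acc d =>
      if pvValid g (pvAdd (pvEnd start u₀) d) = true then
        pvPush (pvEnt start (u₀ ++ [d])) acc else acc) Q'')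
    m out (by simpa using hlen) ((List.pairwise_cons.1 hsort).2) hpush' hclosed' ?_ hQnsort ?_ ?_ ?_
  · rw [hres]
    have hnot : pvFWdb g fk start dd u₀ = false := by
      rw [← Bool.not_eq_true]
      intro hcon
      exact hfin (((pvFWb_iff g fk start u₀).1 ((pvFWdb_iff g fk start dd u₀).1 hcon).1).2.2.2)
    simp [hnot]
  · -- hQw for the new queue
    intro e he
    rcases (hQnmem e).1 he with h | ⟨dd', hdd, hv, rfl⟩
    · exact hQw' e h
    · exact ⟨u₀ ++ [dd'], hchildU dd' hdd hv, rfl⟩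
  · -- frontier for the new queue
    intro r hr
    obtain ⟨q, hpre, hqQ⟩ := hfront r (List.mem_cons_of_mem _ hr)
    rcases List.mem_cons.1 hqQ with he | hm2
    · have hq : q = u₀ := pvEnt_inj he
      subst hq
      have hne : q ≠ r := fun he2 => hnotin (he2 ▸ hr)
      obtain ⟨d', rest, rfl⟩ := pvProperPrefix_decomp hpre hne
      refine ⟨q ++ [d'], ⟨rest, by simp⟩, ?_⟩
      rw [hQnmem]
      right
      have hpushr := (pvPushb_iff g fk start dd _).1 (hpush' _ hr)
      have hd'dir : d' ∈ pvDirsA := by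
        have := hpushr.1
        simp only [pvDirLst, List.all_eq_true] at this
        have hd'mem : d' ∈ q ++ d' :: rest := by simp
        simpa using this _ hd'mem
      have hv : pvValid g (pvAdd (pvEnd start q) d') = true := by
        have h2 := hpushr.2.1
        rw [pvOk_append, Bool.and_eq_true] at h2
        have h3 := h2.2
        simp only [pvOk, Bool.and_eq_true] at h3
        exact h3.1
      exact ⟨d', hd'dir, hv, rfl⟩
    · exact ⟨q, hpre, (hQnmem _).2 (Or.inl hm2)⟩
  · -- parent of each queue walk is popped
    intro r hrm
    rcases (hQnmem _).1 hrm with h | ⟨dd', _, _, he⟩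
    · exact (hpar r (List.mem_cons_of_mem _ h)).imp id
        (fun hnd h2 => hnd (List.mem_cons_of_mem _ h2))
    · right
      have : r = u₀ ++ [dd'] := pvEnt_inj he
      subst this
      rw [List.dropLast_concat]
      exact hnotin
  · -- the minimal-length information survives
    rcases hm with ⟨rfl, hmAll⟩ | ⟨rfl, w, hw, hwU⟩
    · refine Or.inl ⟨rfl, fun r hrd => ?_⟩
      rcases List.mem_cons.1 (hmAll r hrd) with rfl | h
      · exact absurd (((pvFWb_iff g fk start r).1
          ((pvFWdb_iff g fk start dd r).1 hrd).1).2.2.2) hfin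
      · exact h
    · exact Or.inr ⟨rfl, w, hw, fun h => hwU (List.mem_cons_of_mem _ h)⟩

-- Invariant: U is the sorted list of not-yet-popped pushable walks, Q the frontier.
theorem pvLoopA_run (g : PySem.Dict (Int × Int) String) (fk : String) (start : Int × Int)
    (dd : Nat)
    (hdmin : ∀ r, pvFWb g fk start r = true → dd ≤ r.length)
    (hdex : ∃ w, pvFWb g fk start w = true ∧ w.length = dd) :
    ∀ (fuel : Nat), pvIH g fk start dd fuel := by
  intro fuel
  induction fuel with
  | zero =>
      intro U Q m out hlen _ _ _ _ _ _ _ _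
      have hU : U = [] := List.length_eq_zero_iff.1 (Nat.le_zero.1 hlen)
      subst hU
      simp [pvLoopA]
  | succ f ih =>
      intro U Q m out hlen hsort hpush hclosed hQw hQsort hfront hpar hm
      cases U with
      | nil =>
          have hQ : Q = [] := by
            cases Q with
            | nil => rfl
            | cons e q => exact absurd (hQw e List.mem_cons_self) (by simp)
          subst hQ
          simp [pvLoopA]
      | cons u₀ U' =>
          have hnotin : u₀ ∉ U' := pvNotMemHead hsort
          obtain ⟨Q'', rfl⟩ := pvHeadQ start hsort hQw hQsort hfront
          have hpushb₀ := (pvPushb_iff g fk start dd u₀).1 (hpush u₀ List.mem_cons_self)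
          -- one unfolding of the loop
          rw [show pvLoopA g fk (f + 1) (pvEnt start u₀ :: Q'') m out =
            (let length := (pvEnt start u₀).1 + 1;
            if (match m with | some mv => decide (mv < length) | none => false) then
              pvLoopA g fk f Q'' m out
            else if g.get? ((pvEnt start u₀).2.1, (pvEnt start u₀).2.2.1) = some fk then
              pvLoopA g fk f Q'' (some length) (out ++ [(pvEnt start u₀).2.2.2])
            else
              pvLoopA g fk f
                ([((0 : Int), (-1 : Int)), (1, 0), (0, 1), (-1, 0)].foldl (fun acc d =>
                  let x2 := (pvEnt start u₀).2.1 + d.1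
                  let y2 := (pvEnt start u₀).2.2.1 + d.2
                  match g.get? (x2, y2) with
                  | some k => if k ≠ " " then pvPush (length, x2, y2, (pvEnt start u₀).2.2.2 ++ [d]) acc else acc
                  | none => acc) Q'')
                m out) from rfl]
          simp only [pvEnt]
          have hEndPair : (((pvEnd start u₀).1, (pvEnd start u₀).2) : Int × Int) =
            pvEnd start u₀ := rfl
          rcases hm with ⟨rfl, hmAll⟩ | ⟨rfl, w, hw, hwU⟩
          · -- m = none : never pruned
            rw [if_neg (by simp)]
            by_cases hfin : g.get? (pvEnd start u₀) = some fk
            · rw [if_pos (by rw [hEndPair]; exact hfin)]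
              have hFW : pvFWb g fk start u₀ = true :=
                (pvFWb_iff g fk start u₀).2
                  ⟨hpushb₀.1, hpushb₀.2.1, hpushb₀.2.2.1, hfin⟩
              have huld : u₀.length = dd := by
                have hge := hdmin u₀ hFW
                obtain ⟨w, hwF, hwl⟩ := hdex
                have hwd : pvFWdb g fk start dd w = true :=
                  (pvFWdb_iff g fk start dd w).2 ⟨hwF, hwl⟩
                rcases List.mem_cons.1 (hmAll w hwd) with rfl | hwU'
                · omega
                · have := pvLtW_length_le ((List.pairwise_cons.1 hsort).1 _ hwU')
                  omega
              exact pvYieldAux g fk start dd f ih u₀ U' Q'' out hlen hsort hpush hclosed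
                hQw hQsort hfront hpar hfin huld
            · rw [if_neg (by rw [hEndPair]; exact hfin)]
              have hbound : u₀.length ≤ dd := by
                by_contra hgt
                have hlong : u₀.length = dd + 1 := by
                  have := hpushb₀.2.2.2
                  omega
                obtain ⟨w, hwF, hwl⟩ := hdex
                have hwd : pvFWdb g fk start dd w = true :=
                  (pvFWdb_iff g fk start dd w).2 ⟨hwF, hwl⟩
                rcases List.mem_cons.1 (hmAll w hwd) with rfl | hwU'
                · omega
                · have := pvLtW_length_le ((List.pairwise_cons.1 hsort).1 _ hwU')
                  omega
              exact pvExpandAux g fk start dd f ih u₀ U' Q'' none out hlen hsort hpush hclosed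
                hQw hQsort hfront hpar (Or.inl ⟨rfl, hmAll⟩) hfin hbound
          · -- m = some (dd + 1)
            split_ifs with hcnd hfin
            · -- SKIP branch
              have hgt : dd < u₀.length := by simpa using hcnd
              have hlong : u₀.length = dd + 1 := by
                have := hpushb₀.2.2.2
                omega
              have hnoext : ∀ r ∈ U', ¬ u₀ <+: r := by
                intro r hr hpre
                have hne : u₀ ≠ r := fun he => hnotin (he ▸ hr)
                obtain ⟨d, rest, rfl⟩ := pvProperPrefix_decomp hpre hne
                have := ((pvPushb_iff g fk start dd _).1
                  (hpush _ (List.mem_cons_of_mem _ hr))).2.2.2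
                simp [hlong] at this
              have hres := ih U' Q'' (some ((dd : Int) + 1)) out (by simpa using hlen)
                ((List.pairwise_cons.1 hsort).2)
                (fun r hr => hpush r (List.mem_cons_of_mem _ hr))
                (by
                  intro r hr hrU u hu
                  by_cases hru : r = u₀
                  · subst hru; exact (List.pairwise_cons.1 hsort).1 _ hu
                  · exact hclosed r hr (by simp [hru, hrU]) u (List.mem_cons_of_mem _ hu))
                (pvTailQ start hQw hQsort) ((List.pairwise_cons.1 hQsort).2)
                (pvFrontTail start hfront hnotin hnoext)
                (fun r hr => (hpar r (List.mem_cons_of_mem _ hr)).imp id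
                  (fun h h2 => h (List.mem_cons_of_mem _ h2)))
                (Or.inr ⟨rfl, w, hw, fun h => hwU (List.mem_cons_of_mem _ h)⟩)
              rw [hres]
              have hnot : pvFWdb g fk start dd u₀ = false := by
                rw [← Bool.not_eq_true]
                intro hcon
                have := ((pvFWdb_iff g fk start dd u₀).1 hcon).2
                omega
              simp [hnot]
            · -- YIELD branch
              have hbound : u₀.length ≤ dd := by
                have : ¬ dd < u₀.length := by simpa using hcnd
                omega
              have hfin' : g.get? (pvEnd start u₀) = some fk := hfin
              have hFW : pvFWb g fk start u₀ = true :=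
                (pvFWb_iff g fk start u₀).2
                  ⟨hpushb₀.1, hpushb₀.2.1, hpushb₀.2.2.1, hfin'⟩
              have huld : u₀.length = dd := by
                have := hdmin u₀ hFW
                omega
              exact pvYieldAux g fk start dd f ih u₀ U' Q'' out hlen hsort hpush hclosed
                hQw hQsort hfront hpar hfin' huld
            · -- EXPAND branch
              have hbound : u₀.length ≤ dd := by
                have : ¬ dd < u₀.length := by simpa using hcnd
                omega
              have hfin' : ¬ g.get? (pvEnd start u₀) = some fk := hfin
              exact pvExpandAux g fk start dd f ih u₀ U' Q'' (some ((dd : Int) + 1)) out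
                hlen hsort hpush hclosed hQw hQsort hfront hpar
                (Or.inr ⟨rfl, w, hw, hwU⟩) hfin' hbound


-- ---- characterization of B's depth-first enumeration ----

theorem pvWalksB_zero (g : PySem.Dict (Int × Int) String) (fk : String) (p : Int × Int) :
    pvWalksB g fk 0 p = if g.get? p = some fk then [(p, [])] else [] := by
  rw [pvWalksB]

theorem pvBodyB (g : PySem.Dict (Int × Int) String) (fk : String) (d : Nat) (p dir : Int × Int)
    (acc : List ((Int × Int) × List (Int × Int))) :
    (match g.get? (pvAdd p dir) with
      | some k => if k ≠ " " then
          acc ++ (pvWalksB g fk d (pvAdd p dir)).map (fun er => (er.1, dir :: er.2)) else acc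
      | none => acc) =
    acc ++ (if pvValid g (pvAdd p dir) = true then
      (pvWalksB g fk d (pvAdd p dir)).map (fun er => (er.1, dir :: er.2)) else []) := by
  cases hk : g.get? (pvAdd p dir) with
  | none => simp [pvValid, hk]
  | some k =>
      by_cases hks : k = " "
      · subst hks; simp [pvValid, hk]
      · simp [pvValid, hk, hks]

theorem pvWalksB_succ (g : PySem.Dict (Int × Int) String) (fk : String) (d : Nat) (p : Int × Int)
    (hnf : ¬ g.get? p = some fk) :
    pvWalksB g fk (d + 1) p = [((-1 : Int), (0 : Int)), (0, -1), (0, 1), (1, 0)].flatMap (fun dir =>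
      if pvValid g (pvAdd p dir) = true then
        (pvWalksB g fk d (pvAdd p dir)).map (fun er => (er.1, dir :: er.2)) else []) := by
  rw [pvWalksB, if_neg hnf]
  exact (PySem.List.foldl_congr_mem _ _
    (fun acc dir => acc ++ (if pvValid g (pvAdd p dir) = true then
      (pvWalksB g fk d (pvAdd p dir)).map (fun er => (er.1, dir :: er.2)) else [])) _
    (fun acc dir _ => pvBodyB g fk d p dir acc)).trans
    (PySem.List.foldl_append_eq_flatMap _ _ [])

theorem pvDirsB_sub (dir : Int × Int)
    (h : dir ∈ [((-1 : Int), (0 : Int)), (0, -1), (0, 1), (1, 0)]) : dir ∈ pvDirsA := by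
  simp only [List.mem_cons, List.not_mem_nil, or_false] at h
  rcases h with rfl | rfl | rfl | rfl <;> decide

theorem pvWalksB_mem (g : PySem.Dict (Int × Int) String) (fk : String) :
    ∀ (depth : Nat) (p : Int × Int) (er : (Int × Int) × List (Int × Int)),
      er ∈ pvWalksB g fk depth p ↔
        (er.2.length = depth ∧ pvDirLst er.2 = true ∧ pvOk g p er.2 = true ∧
          pvNF g fk p er.2 = true ∧ g.get? (pvEnd p er.2) = some fk ∧ er.1 = pvEnd p er.2)
  | 0, p, er => by
      rw [pvWalksB_zero]
      by_cases hf : g.get? p = some fk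
      · rw [if_pos hf]
        constructor
        · intro h
          rcases List.mem_singleton.1 h with rfl
          exact ⟨rfl, rfl, rfl, rfl, hf, rfl⟩
        · rintro ⟨hl, -, -, -, hfk, hp⟩
          rcases er with ⟨q, r⟩
          rw [List.length_eq_zero_iff] at hl
          simp only at hl
          subst hl
          simp only [pvEnd, List.foldl_nil] at hp
          subst hp
          simp
      · rw [if_neg hf]
        simp only [List.not_mem_nil, false_iff]
        rintro ⟨hl, -, -, -, hfk, -⟩
        rw [List.length_eq_zero_iff] at hl
        rw [hl] at hfk
        simp only [pvEnd, List.foldl_nil] at hfk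
        exact hf hfk
  | d + 1, p, er => by
      by_cases hf : g.get? p = some fk
      · rw [pvWalksB]
        rw [if_pos hf]
        simp only [List.not_mem_nil, false_iff]
        rintro ⟨hl, -, -, hnf, -, -⟩
        cases hr : er.2 with
        | nil => rw [hr] at hl; simp at hl
        | cons d0 r0 =>
            rw [hr] at hnf
            simp only [pvNF, Bool.and_eq_true] at hnf
            have := hnf.1
            simp [hf] at this
      · rw [pvWalksB_succ g fk d p hf]
        simp only [List.mem_flatMap]
        constructor
        · rintro ⟨dir, hdir, hmem⟩
          split_ifs at hmem with hv
          · rcases List.mem_map.1 hmem with ⟨er0, her0, rfl⟩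
            rcases (pvWalksB_mem g fk d (pvAdd p dir) er0).1 her0 with
              ⟨hl, hdl, hok, hnf, hfk, hp⟩
            refine ⟨by simp [hl], ?_, ?_, ?_, ?_, ?_⟩
            · simp only [pvDirLst, List.all_cons, Bool.and_eq_true]
              exact ⟨by simpa using pvDirsB_sub dir hdir, hdl⟩
            · simp only [pvOk, Bool.and_eq_true]
              exact ⟨hv, hok⟩
            · simp only [pvNF, Bool.and_eq_true]
              exact ⟨by simpa using hf, hnf⟩
            · simpa [pvEnd] using hfk
            · simpa [pvEnd] using hp
          · simp at hmem
        · rintro ⟨hl, hdl, hok, hnf, hfk, hp⟩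
          cases hr : er.2 with
          | nil => rw [hr] at hl; simp at hl
          | cons d0 r0 =>
              rw [hr] at hl hdl hok hnf hfk hp
              simp only [pvDirLst, List.all_cons, Bool.and_eq_true] at hdl
              simp only [pvOk, Bool.and_eq_true] at hok
              simp only [pvNF, Bool.and_eq_true] at hnf
              refine ⟨d0, ?_, ?_⟩
              · have hmemA : d0 ∈ pvDirsA := by simpa using hdl.1
                simp only [pvDirsA, List.mem_cons, List.not_mem_nil, or_false] at hmemA
                rcases hmemA with rfl | rfl | rfl | rfl <;> simp
              · rw [if_pos hok.1]
                refine List.mem_map.2 ⟨(er.1, r0), ?_, ?_⟩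
                · refine (pvWalksB_mem g fk d (pvAdd p d0) (er.1, r0)).2
                    ⟨by simpa using hl, hdl.2, hok.2, hnf.2, ?_, ?_⟩
                  · simpa [pvEnd] using hfk
                  · simpa [pvEnd] using hp
                · rcases er with ⟨q, r⟩
                  simp only at hr
                  rw [hr]

theorem pvCmpRoute_cons_lt (d : Int × Int) (r s : List (Int × Int)) :
    pvCmpRoute (d :: r) (d :: s) = pvCmpRoute r s := by
  have he : pvCmpPair d d = .eq := (pvCmpPair_eq_iff d d).2 rfl
  simp [pvCmpRoute, he, Ordering.then]

-- blocks of routes grouped by a strictly increasing first step stay strictly ordered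
theorem pvFlatMap_pairwise (F : (Int × Int) → List ((Int × Int) × List (Int × Int))) :
    ∀ (ds : List (Int × Int)),
      ds.Pairwise (fun a b => pvCmpPair a b = .lt) →
      (∀ d er, er ∈ F d → ∃ r, er.2 = d :: r) →
      (∀ d, (F d).Pairwise (fun a b => pvCmpRoute a.2 b.2 = .lt)) →
      (ds.flatMap F).Pairwise (fun a b => pvCmpRoute a.2 b.2 = .lt)
  | [], _, _, _ => List.Pairwise.nil
  | d :: ds, hds, hhead, hin => by
      rw [List.flatMap_cons, List.pairwise_append]
      refine ⟨hin d, pvFlatMap_pairwise F ds (List.pairwise_cons.1 hds).2 hhead hin, ?_⟩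
      intro a ha b hb
      obtain ⟨ra, hra⟩ := hhead d a ha
      rcases List.mem_flatMap.1 hb with ⟨d', hd', hbmem⟩
      obtain ⟨rb, hrb⟩ := hhead d' b hbmem
      rw [hra, hrb]
      have hlt : pvCmpPair d d' = .lt := (List.pairwise_cons.1 hds).1 d' hd'
      simp [pvCmpRoute, hlt, Ordering.then]

theorem pvWalksB_sorted (g : PySem.Dict (Int × Int) String) (fk : String) :
    ∀ (depth : Nat) (p : Int × Int),
      (pvWalksB g fk depth p).Pairwise (fun a b => pvCmpRoute a.2 b.2 = .lt)
  | 0, p => by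
      rw [pvWalksB_zero]
      split_ifs <;> simp
  | d + 1, p => by
      by_cases hf : g.get? p = some fk
      · rw [pvWalksB, if_pos hf]
        exact List.Pairwise.nil
      · rw [pvWalksB_succ g fk d p hf]
        refine pvFlatMap_pairwise _ _ (by decide) ?_ ?_
        · intro dir er her
          split_ifs at her with hv
          · rcases List.mem_map.1 her with ⟨er0, -, rfl⟩
            exact ⟨er0.2, rfl⟩
          · simp at her
        · intro dir
          split_ifs with hv
          · refine List.Pairwise.map _ ?_ (pvWalksB_sorted g fk d (pvAdd p dir))
            intro a b hab
            simpa [pvCmpRoute_cons_lt] using hab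
          · exact List.Pairwise.nil

-- sorted(found) in B: strict order on the (position, route) pairs
theorem pvPairLt_total (a b : (Int × Int) × List (Int × Int)) (h : a ≠ b) :
    pvPairLt a b = true ∨ pvPairLt b a = true := by
  have hne : ((0 : Int), a.1.1, a.1.2, a.2) ≠ ((0 : Int), b.1.1, b.1.2, b.2) := by
    intro he
    apply h
    rcases a with ⟨⟨a1, a2⟩, ar⟩; rcases b with ⟨⟨b1, b2⟩, br⟩
    simp only [Prod.mk.injEq] at he ⊢
    exact ⟨⟨he.2.1, he.2.2.1⟩, he.2.2.2⟩
  rcases pvLtE_total hne with h1 | h1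
  · exact Or.inl (by simpa [pvPairLt, pvLtE] using h1)
  · exact Or.inr (by simpa [pvPairLt, pvLtE] using h1)

theorem pvPairLt_trans (a b c : (Int × Int) × List (Int × Int))
    (h1 : pvPairLt a b = true) (h2 : pvPairLt b c = true) : pvPairLt a c = true := by
  simp only [pvPairLt, decide_eq_true_eq] at h1 h2 ⊢
  exact pvCmpE_trans h1 h2

theorem pvSortPairs_spec (l : List ((Int × Int) × List (Int × Int)))
    (hnd : l.Nodup) :
    (pvSortPairs l).Perm l ∧ (pvSortPairs l).Pairwise (fun a b => pvPairLt a b = true) := by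
  constructor
  · simpa using pvSortFold_perm pvPairLt l []
  · exact pvSortFold_pairwise pvPairLt pvPairLt_total
      (fun a b c => pvPairLt_trans a b c) l [] hnd List.Pairwise.nil (by simp)

-- two strictly sorted lists with the same members are equal
theorem pvSortedExt {α : Type} (R : α → α → Prop) (hasym : ∀ a b, R a b → ¬ R b a) :
    ∀ (l₁ l₂ : List α), l₁.Pairwise R → l₂.Pairwise R → (∀ x, x ∈ l₁ ↔ x ∈ l₂) → l₁ = l₂
  | [], [], _, _, _ => rfl
  | [], b :: t₂, _, _, hm => absurd ((hm b).2 List.mem_cons_self) (List.not_mem_nil)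
  | a :: t₁, [], _, _, hm => absurd ((hm a).1 List.mem_cons_self) (List.not_mem_nil)
  | a :: t₁, b :: t₂, h₁, h₂, hm => by
      have hab : a = b := by
        by_contra hne
        have ha2 : a ∈ b :: t₂ := (hm a).1 List.mem_cons_self
        have hb1 : b ∈ a :: t₁ := (hm b).2 List.mem_cons_self
        rcases List.mem_cons.1 ha2 with he | ha2'
        · exact hne he
        · rcases List.mem_cons.1 hb1 with he | hb1'
          · exact hne he.symm
          · exact hasym _ _ ((List.pairwise_cons.1 h₁).1 _ hb1')
              ((List.pairwise_cons.1 h₂).1 _ ha2')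
      subst hab
      have htl : ∀ x, x ∈ t₁ ↔ x ∈ t₂ := by
        intro x
        constructor
        · intro hx
          have hxl : x ∈ a :: t₂ := (hm x).1 (List.mem_cons_of_mem _ hx)
          rcases List.mem_cons.1 hxl with rfl | h
          · exact absurd ((List.pairwise_cons.1 h₁).1 _ hx) (fun hc => hasym _ _ hc hc)
          · exact h
        · intro hx
          have hxl : x ∈ a :: t₁ := (hm x).2 (List.mem_cons_of_mem _ hx)
          rcases List.mem_cons.1 hxl with rfl | h
          · exact absurd ((List.pairwise_cons.1 h₂).1 _ hx) (fun hc => hasym _ _ hc hc)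
          · exact h
      rw [pvSortedExt R hasym t₁ t₂ (List.pairwise_cons.1 h₁).2 (List.pairwise_cons.1 h₂).2 htl]

-- running the iterative deepening loop of B
theorem pvDeepB_run (g : PySem.Dict (Int × Int) String) (fk : String) (start : Int × Int)
    (dd : Nat)
    (hdmin : ∀ r, pvFWb g fk start r = true → dd ≤ r.length)
    (hdex : ∃ w, pvFWb g fk start w = true ∧ w.length = dd) :
    ∀ (k depth : Nat), depth ≤ dd → dd < depth + k →
      pvDeepB g fk start k depth = (pvSortPairs (pvWalksB g fk dd start)).map (fun er => er.2)
  | 0, depth, hle, hlt => by omega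
  | k + 1, depth, hle, hlt => by
      rw [pvDeepB]
      by_cases hdep : depth = dd
      · subst hdep
        have hne : pvWalksB g fk depth start ≠ [] := by
          obtain ⟨w, hwF, hwl⟩ := hdex
          rcases (pvFWb_iff g fk start w).1 hwF with ⟨hdl, hok, hnf, hfk⟩
          intro hnil
          have : (pvEnd start w, w) ∈ pvWalksB g fk depth start :=
            (pvWalksB_mem g fk depth start (pvEnd start w, w)).2 ⟨hwl, hdl, hok, hnf, hfk, rfl⟩
          rw [hnil] at this
          exact List.not_mem_nil this
        rw [if_neg hne]
      · have hemp : pvWalksB g fk depth start = [] := by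
          cases hW : pvWalksB g fk depth start with
          | nil => rfl
          | cons er rest =>
              exfalso
              have hmem : er ∈ pvWalksB g fk depth start := by rw [hW]; exact List.mem_cons_self
              rcases (pvWalksB_mem g fk depth start er).1 hmem with ⟨hl, hdl, hok, hnf, hfk, -⟩
              have : pvFWb g fk start er.2 = true :=
                (pvFWb_iff g fk start er.2).2 ⟨hdl, hok, hnf, hfk⟩
              have := hdmin _ this
              omega
        rw [if_pos hemp]
        exact pvDeepB_run g fk start dd hdmin hdex k (depth + 1) (by omega) (by omega)

-- ---- the per-pair equality ----

def pvSortW (start : Int × Int) (l : List (List (Int × Int))) : List (List (Int × Int)) :=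
  l.foldl (fun acc r =>
    PySem.List.insertBy (fun a b => pvCmpE (pvEnt start a) (pvEnt start b) = .lt) r acc) []

theorem pvSortW_spec (start : Int × Int) (l : List (List (Int × Int))) (hnd : l.Nodup) :
    (pvSortW start l).Perm l ∧ (pvSortW start l).Pairwise (pvLtW start) := by
  constructor
  · simpa [pvSortW] using
      pvSortFold_perm (fun a b => decide (pvCmpE (pvEnt start a) (pvEnt start b) = .lt)) l []
  · have h := pvSortFold_pairwise (fun a b => decide (pvCmpE (pvEnt start a) (pvEnt start b) = .lt))
      (fun a b hne => by
        rcases pvLtW_total (start := start) hne with h | h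
        · exact Or.inl (by simpa [pvLtW, pvLtE] using h)
        · exact Or.inr (by simpa [pvLtW, pvLtE] using h))
      (fun a b c h1 h2 => by
        simp only [decide_eq_true_eq] at h1 h2 ⊢
        exact pvCmpE_trans h1 h2)
      l [] hnd List.Pairwise.nil (by simp)
    exact (h.imp (fun hx => by simpa [pvLtW, pvLtE] using hx) :
      (pvSortW start l).Pairwise (pvLtW start))

theorem pvCmpE_same_head (n : Int) (x1 y1 x2 y2 : Int) (r s : List (Int × Int)) :
    pvCmpE (n, x1, y1, r) (n, x2, y2, s) = pvCmpE (0, x1, y1, r) (0, x2, y2, s) := by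
  have h : compare n n = Ordering.eq := compare_eq_iff_eq.2 rfl
  have h0 : compare (0 : Int) 0 = Ordering.eq := compare_eq_iff_eq.2 rfl
  simp [pvCmpE, h, h0, Ordering.eq_then]

theorem pvPairLt_toLtW (start : Int × Int) (a b : (Int × Int) × List (Int × Int))
    (ha : a.1 = pvEnd start a.2) (hb : b.1 = pvEnd start b.2)
    (hl : a.2.length = b.2.length) (h : pvPairLt a b = true) : pvLtW start a.2 b.2 := by
  simp only [pvPairLt, decide_eq_true_eq] at h
  simp only [pvLtW, pvLtE, pvEnt]
  rw [show ((a.2.length : Int)) = ((b.2.length : Int)) from by exact_mod_cast hl]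
  rw [pvCmpE_same_head]
  rw [ha, hb] at h
  exact h

theorem pvWalksB_nodup (g : PySem.Dict (Int × Int) String) (fk : String) (depth : Nat)
    (p : Int × Int) : (pvWalksB g fk depth p).Nodup := by
  have h := pvWalksB_sorted g fk depth p
  exact List.Pairwise.imp (fun {a b} hab heq => by
    rw [heq] at hab
    rw [(pvCmpRoute_eq_iff b.2 b.2).2 rfl] at hab
    cases hab) h

-- A's heap search result for one key pair, from the invariant machine
theorem pvPairA (g : PySem.Dict (Int × Int) String) (fk : String) (start : Int × Int) (dd : Nat)
    (hdmin : ∀ r, pvFWb g fk start r = true → dd ≤ r.length)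
    (hdex : ∃ w, pvFWb g fk start w = true ∧ w.length = dd)
    (hdsz : dd ≤ g.size) :
    pvLoopA g fk (4 ^ (g.size + 2)) [((0 : Int), start.1, start.2, [])] none [] =
      (pvSortW start ((pvUpto (dd + 2)).filter (fun r => pvPushb g fk start dd r))).filter
        (fun r => pvFWdb g fk start dd r) := by
  set L := (pvUpto (dd + 2)).filter (fun r => pvPushb g fk start dd r) with hL
  have hndL : L.Nodup := (nodup_pvUpto _).filter _
  obtain ⟨hperm, hpw⟩ := pvSortW_spec start L hndL
  have hmemU : ∀ r, r ∈ pvSortW start L ↔ pvPushb g fk start dd r = true := by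
    intro r
    rw [hperm.mem_iff, hL, List.mem_filter, mem_pvUpto]
    constructor
    · rintro ⟨-, h⟩; exact h
    · intro h
      refine ⟨⟨?_, ((pvPushb_iff g fk start dd r).1 h).1⟩, h⟩
      have := ((pvPushb_iff g fk start dd r).1 h).2.2.2
      omega
  have hpush0 : pvPushb g fk start dd [] = true := by
    rw [pvPushb_iff]
    exact ⟨rfl, rfl, rfl, by simp⟩
  have hrun := pvLoopA_run g fk start dd hdmin hdex (4 ^ (g.size + 2)) (pvSortW start L)
    [pvEnt start []] none []
    (by
      have h1 : (pvSortW start L).length = L.length := hperm.length_eq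
      have h2 : L.length ≤ (pvUpto (dd + 2)).length := List.length_filter_le _ _
      have h3 : (pvUpto (dd + 2)).length ≤ 4 ^ (dd + 2) := length_pvUpto_le _
      have h4 : (4 : Nat) ^ (dd + 2) ≤ 4 ^ (g.size + 2) :=
        Nat.pow_le_pow_right (by norm_num) (by omega)
      omega)
    hpw
    (fun r hr => (hmemU r).1 hr)
    (fun r hr hnr => absurd ((hmemU r).2 hr) hnr)
    (fun e he => ⟨[], (hmemU []).2 hpush0, by simpa using he⟩)
    (by simp)
    (fun r _ => ⟨[], List.nil_prefix, List.mem_singleton.2 rfl⟩)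
    (fun r hr => Or.inl (pvEnt_inj (List.mem_singleton.1 hr)))
    (Or.inl ⟨rfl, fun r hrd => by
      rcases (pvFWdb_iff g fk start dd r).1 hrd with ⟨hF, hlr⟩
      rcases (pvFWb_iff g fk start r).1 hF with ⟨h1, h2, h3, -⟩
      exact (hmemU r).2 ((pvPushb_iff g fk start dd r).2 ⟨h1, h2, h3, by omega⟩)⟩)
  rw [← pvEnt_nil start, hrun]
  simp

-- one key pair, reachable case: A's heap search equals B's iterative deepening
theorem pvPairMain (g : PySem.Dict (Int × Int) String) (fk : String) (start : Int × Int)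
    (dd : Nat)
    (hdmin : ∀ r, pvFWb g fk start r = true → dd ≤ r.length)
    (hdex : ∃ w, pvFWb g fk start w = true ∧ w.length = dd)
    (hdsz : dd ≤ g.size) :
    pvLoopA g fk (4 ^ (g.size + 2)) [((0 : Int), start.1, start.2, [])] none [] =
      pvDeepB g fk start (g.size + 1) 0 := by
  rw [pvPairA g fk start dd hdmin hdex hdsz,
    pvDeepB_run g fk start dd hdmin hdex (g.size + 1) 0 (by omega) (by omega)]
  obtain ⟨hperm2, hpw2⟩ := pvSortPairs_spec (pvWalksB g fk dd start) (pvWalksB_nodup g fk dd start)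
  set L := (pvUpto (dd + 2)).filter (fun r => pvPushb g fk start dd r) with hL
  have hndL : L.Nodup := (nodup_pvUpto _).filter _
  obtain ⟨hperm, hpw⟩ := pvSortW_spec start L hndL
  have hmemU : ∀ r, r ∈ pvSortW start L ↔ pvPushb g fk start dd r = true := by
    intro r
    rw [hperm.mem_iff, hL, List.mem_filter, mem_pvUpto]
    constructor
    · rintro ⟨-, h⟩; exact h
    · intro h
      refine ⟨⟨?_, ((pvPushb_iff g fk start dd r).1 h).1⟩, h⟩
      have := ((pvPushb_iff g fk start dd r).1 h).2.2.2
      omega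
  have hmemS : ∀ er, er ∈ pvSortPairs (pvWalksB g fk dd start) ↔
      er ∈ pvWalksB g fk dd start := fun er => hperm2.mem_iff
  refine pvSortedExt (pvLtW start) (fun a b => pvLtW_asymm) _ _ ?_ ?_ ?_
  · exact List.Pairwise.filter _ hpw
  · rw [List.pairwise_map]
    refine hpw2.imp_of_mem ?_
    intro a b ha hb hab
    rcases (pvWalksB_mem g fk dd start a).1 ((hmemS a).1 ha) with ⟨hla, -, -, -, -, hpa⟩
    rcases (pvWalksB_mem g fk dd start b).1 ((hmemS b).1 hb) with ⟨hlb, -, -, -, -, hpb⟩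
    exact pvPairLt_toLtW start a b hpa hpb (by omega) hab
  · intro x
    rw [List.mem_filter, List.mem_map]
    constructor
    · rintro ⟨-, hF⟩
      rcases (pvFWdb_iff g fk start dd x).1 hF with ⟨hFW, hlen⟩
      rcases (pvFWb_iff g fk start x).1 hFW with ⟨h1, h2, h3, h4⟩
      exact ⟨(pvEnd start x, x), (hmemS _).2 ((pvWalksB_mem g fk dd start _).2
        ⟨hlen, h1, h2, h3, h4, rfl⟩), rfl⟩
    · rintro ⟨er, hmem, rfl⟩
      rcases (pvWalksB_mem g fk dd start er).1 ((hmemS er).1 hmem) with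
        ⟨hl, hdl, hok, hnf, hfk, -⟩
      have hF : pvFWdb g fk start dd er.2 = true :=
        (pvFWdb_iff g fk start dd er.2).2 ⟨(pvFWb_iff g fk start er.2).2 ⟨hdl, hok, hnf, hfk⟩, hl⟩
      refine ⟨(hmemU er.2).2 ?_, hF⟩
      rcases (pvFWb_iff g fk start er.2).1 ((pvFWdb_iff g fk start dd er.2).1 hF).1 with
        ⟨h1, h2, h3, -⟩
      exact (pvPushb_iff g fk start dd er.2).2 ⟨h1, h2, h3, by omega⟩

-- ---- from the reachability precondition to a finish walk ----

theorem pvInnerMono (g : PySem.Dict (Int × Int) String) (p x : Int × Int) :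
    ∀ (ds : List (Int × Int)) (acc : List (Int × Int)), x ∈ acc →
      x ∈ ds.foldl (fun acc d =>
        let q := (p.1 + d.1, p.2 + d.2)
        if pvValid g q ∧ q ∉ acc then acc ++ [q] else acc) acc
  | [], acc, hx => hx
  | d :: ds, acc, hx => by
      simp only [List.foldl_cons]
      apply pvInnerMono
      split_ifs
      · exact List.mem_append_left _ hx
      · exact hx

theorem pvStep_mono (g : PySem.Dict (Int × Int) String) (x : Int × Int) :
    ∀ (L acc : List (Int × Int)), x ∈ acc →
      x ∈ L.foldl (fun acc p => pvDirsA.foldl (fun acc d =>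
        let q := (p.1 + d.1, p.2 + d.2)
        if pvValid g q ∧ q ∉ acc then acc ++ [q] else acc) acc) acc
  | [], acc, hx => hx
  | p :: L, acc, hx => by
      simp only [List.foldl_cons]
      exact pvStep_mono g x L _ (pvInnerMono g p x pvDirsA acc hx)

theorem pvReachN_mono (g : PySem.Dict (Int × Int) String) (x : Int × Int) :
    ∀ (n : Nat) (S : List (Int × Int)), x ∈ S → x ∈ pvReachN g n S
  | 0, S, hx => hx
  | n + 1, S, hx => pvReachN_mono g x n _ (by
      show x ∈ pvStep g S
      unfold pvStep
      exact pvStep_mono g x S S hx)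

theorem pvInnerSrc (g : PySem.Dict (Int × Int) String) (p x : Int × Int) :
    ∀ (ds : List (Int × Int)) (acc : List (Int × Int)),
      x ∈ ds.foldl (fun acc d =>
        let q := (p.1 + d.1, p.2 + d.2)
        if pvValid g q ∧ q ∉ acc then acc ++ [q] else acc) acc →
      x ∈ acc ∨ ∃ d ∈ ds, x = pvAdd p d ∧ pvValid g x = true
  | [], acc, hx => Or.inl hx
  | d :: ds, acc, hx => by
      simp only [List.foldl_cons] at hx
      rcases pvInnerSrc g p x ds _ hx with hin | ⟨d', hd', he, hv⟩
      · split_ifs at hin with hc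
        · rcases List.mem_append.1 hin with h | h
          · exact Or.inl h
          · rcases List.mem_singleton.1 h with rfl
            exact Or.inr ⟨d, List.mem_cons_self, rfl, hc.1⟩
        · exact Or.inl hin
      · exact Or.inr ⟨d', List.mem_cons_of_mem _ hd', he, hv⟩

theorem pvStepSrc (g : PySem.Dict (Int × Int) String) (x : Int × Int) :
    ∀ (L acc : List (Int × Int)),
      x ∈ L.foldl (fun acc p => pvDirsA.foldl (fun acc d =>
        let q := (p.1 + d.1, p.2 + d.2)
        if pvValid g q ∧ q ∉ acc then acc ++ [q] else acc) acc) acc →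
      x ∈ acc ∨ ∃ p ∈ L, ∃ d ∈ pvDirsA, x = pvAdd p d ∧ pvValid g x = true
  | [], acc, hx => Or.inl hx
  | p :: L, acc, hx => by
      simp only [List.foldl_cons] at hx
      rcases pvStepSrc g x L _ hx with hin | ⟨p', hp', hrest⟩
      · rcases pvInnerSrc g p x pvDirsA acc hin with h | ⟨d, hd, he, hv⟩
        · exact Or.inl h
        · exact Or.inr ⟨p, List.mem_cons_self, d, hd, he, hv⟩
      · exact Or.inr ⟨p', List.mem_cons_of_mem _ hp', hrest⟩

theorem pvReach_walk (g : PySem.Dict (Int × Int) String) :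
    ∀ (n : Nat) (S : List (Int × Int)) (x : Int × Int), x ∈ pvReachN g n S →
      ∃ p₀ ∈ S, ∃ w : List (Int × Int), pvDirLst w = true ∧ pvOk g p₀ w = true ∧
        pvEnd p₀ w = x ∧ w.length ≤ n
  | 0, S, x, hx => ⟨x, hx, [], rfl, rfl, rfl, by simp⟩
  | n + 1, S, x, hx => by
      rcases pvReach_walk g n (pvStep g S) x hx with ⟨p₀, hp₀, w, hdl, hok, hend, hlen⟩
      rcases pvStepSrc g p₀ S S (by unfold pvStep at hp₀; exact hp₀) with hin | ⟨p₁, hp₁, d, hd, he, hv⟩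
      · exact ⟨p₀, hin, w, hdl, hok, hend, by omega⟩
      · refine ⟨p₁, hp₁, d :: w, ?_, ?_, ?_, by simp; omega⟩
        · simp only [pvDirLst, List.all_cons, Bool.and_eq_true]
          exact ⟨by simpa using hd, hdl⟩
        · simp only [pvOk, Bool.and_eq_true]
          exact ⟨by rw [← he]; exact hv, by rw [← he]; exact hok⟩
        · show pvEnd (pvAdd p₁ d) w = x
          rw [← he]; exact hend

-- cut a walk at its first visit of the finish key
theorem pvTrunc (g : PySem.Dict (Int × Int) String) (fk : String) :
    ∀ (w : List (Int × Int)) (p : Int × Int), pvDirLst w = true → pvOk g p w = true →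
      g.get? (pvEnd p w) = some fk →
      ∃ w', pvDirLst w' = true ∧ pvOk g p w' = true ∧ pvNF g fk p w' = true ∧
        g.get? (pvEnd p w') = some fk ∧ w'.length ≤ w.length
  | w, p, hdl, hok, hfk => by
      by_cases hp : g.get? p = some fk
      · exact ⟨[], rfl, rfl, rfl, hp, by simp⟩
      · cases w with
        | nil => exact absurd hfk hp
        | cons d rest =>
            simp only [pvDirLst, List.all_cons, Bool.and_eq_true] at hdl
            simp only [pvOk, Bool.and_eq_true] at hok
            rcases pvTrunc g fk rest (pvAdd p d) hdl.2 hok.2 hfk with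
              ⟨w'', hdl'', hok'', hnf'', hfk'', hlen''⟩
            refine ⟨d :: w'', ?_, ?_, ?_, hfk'', by simpa using Nat.succ_le_succ hlen''⟩
            · simp only [pvDirLst, List.all_cons, Bool.and_eq_true]
              exact ⟨hdl.1, hdl''⟩
            · simp only [pvOk, Bool.and_eq_true]
              exact ⟨hok.1, hok''⟩
            · simp only [pvNF, Bool.and_eq_true]
              exact ⟨by simpa using hp, hnf''⟩

-- ---- the isolated-start case: both searches return no route ----

theorem pvMatchInvalid {β : Type} (g : PySem.Dict (Int × Int) String) (q : Int × Int)
    (acc X : β) (hv : pvValid g q = false) :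
    (match g.get? q with | some k => if k ≠ " " then X else acc | none => acc) = acc := by
  cases hk : g.get? q with
  | none => rfl
  | some k =>
      simp only [pvValid, hk] at hv
      simp only [ne_eq, decide_eq_false_iff_not, Decidable.not_not] at hv
      simp [hv]

theorem pvWalksB_iso (g : PySem.Dict (Int × Int) String) (fk : String) (start : Int × Int)
    (hfin : ¬ g.get? start = some fk)
    (hiso : ∀ d ∈ pvDirsA, pvValid g (pvAdd start d) = false) :
    ∀ depth : Nat, pvWalksB g fk depth start = []
  | 0 => by rw [pvWalksB_zero, if_neg hfin]
  | d + 1 => by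
      rw [pvWalksB_succ g fk d start hfin]
      have h : ∀ dir ∈ [((-1 : Int), (0 : Int)), (0, -1), (0, 1), (1, 0)],
          (if pvValid g (pvAdd start dir) = true then
            (pvWalksB g fk d (pvAdd start dir)).map (fun er => (er.1, dir :: er.2)) else []) = [] := by
        intro dir hdir
        rw [if_neg (by rw [hiso dir (pvDirsB_sub dir hdir)]; simp)]
      simp only [List.flatMap_cons, List.flatMap_nil]
      rw [h _ (by simp), h _ (by simp), h _ (by simp), h _ (by simp)]
      rfl

theorem pvDeepB_iso (g : PySem.Dict (Int × Int) String) (fk : String) (start : Int × Int)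
    (hfin : ¬ g.get? start = some fk)
    (hiso : ∀ d ∈ pvDirsA, pvValid g (pvAdd start d) = false) :
    ∀ (k depth : Nat), pvDeepB g fk start k depth = []
  | 0, _ => rfl
  | k + 1, depth => by
      rw [pvDeepB, pvWalksB_iso g fk start hfin hiso depth, if_pos rfl]
      exact pvDeepB_iso g fk start hfin hiso k (depth + 1)

theorem pvPairIso (g : PySem.Dict (Int × Int) String) (fk : String) (start : Int × Int)
    (hfin : ¬ g.get? start = some fk)
    (hiso : ∀ d ∈ pvDirsA, pvValid g (pvAdd start d) = false) :
    pvLoopA g fk (4 ^ (g.size + 2)) [((0 : Int), start.1, start.2, [])] none [] =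
      pvDeepB g fk start (g.size + 1) 0 := by
  rw [pvDeepB_iso g fk start hfin hiso]
  obtain ⟨f, hf⟩ : ∃ f, 4 ^ (g.size + 2) = f + 2 := by
    refine ⟨4 ^ (g.size + 2) - 2, ?_⟩
    have : 4 ^ 2 ≤ 4 ^ (g.size + 2) := Nat.pow_le_pow_right (by norm_num) (by omega)
    omega
  rw [hf]
  rw [show pvLoopA g fk (f + 1 + 1) [((0 : Int), start.1, start.2, [])] none [] =
    (if (false : Bool) then pvLoopA g fk (f + 1) [] none []
    else if g.get? (start.1, start.2) = some fk then
      pvLoopA g fk (f + 1) [] (some ((0 : Int) + 1)) ([] ++ [([] : List (Int × Int))])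
    else
      pvLoopA g fk (f + 1)
        ([((0 : Int), (-1 : Int)), (1, 0), (0, 1), (-1, 0)].foldl (fun acc d =>
          let x2 := start.1 + d.1
          let y2 := start.2 + d.2
          match g.get? (x2, y2) with
          | some k => if k ≠ " " then pvPush ((0 : Int) + 1, x2, y2, [] ++ [d]) acc else acc
          | none => acc) [])
        none []) from rfl]
  rw [if_neg (by simp), if_neg (by exact hfin)]
  have hfold : ([((0 : Int), (-1 : Int)), (1, 0), (0, 1), (-1, 0)].foldl (fun acc d =>
      let x2 := start.1 + d.1
      let y2 := start.2 + d.2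
      match g.get? (x2, y2) with
      | some k => if k ≠ " " then pvPush ((0 : Int) + 1, x2, y2, [] ++ [d]) acc else acc
      | none => acc) ([] : List PVE)) = [] := by
    have h1 : pvValid g (start.1 + (-1 : Int), start.2 + (0 : Int)) = false :=
      hiso (-1, 0) (by decide)
    have h2 : pvValid g (start.1 + (0 : Int), start.2 + (1 : Int)) = false :=
      hiso (0, 1) (by decide)
    have h3 : pvValid g (start.1 + (1 : Int), start.2 + (0 : Int)) = false :=
      hiso (1, 0) (by decide)
    have h4 : pvValid g (start.1 + (0 : Int), start.2 + (-1 : Int)) = false :=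
      hiso (0, -1) (by decide)
    simp only [List.foldl_cons, List.foldl_nil]
    rw [pvMatchInvalid g _ _ _ h1, pvMatchInvalid g _ _ _ h2,
      pvMatchInvalid g _ _ _ h3, pvMatchInvalid g _ _ _ h4]
  rw [hfold]
  rfl

-- ---- assembling the whole function ----

theorem pvDictGetMem {κ ν : Type} [BEq κ] [LawfulBEq κ] (d : PySem.Dict κ ν) (k : κ)
    (h : k ∈ d.keys) : ∃ v, d.get? k = some v := by
  have hk : k ∈ d.items.map (fun x => x.1) := h
  rcases List.mem_map.1 hk with ⟨⟨k', v⟩, hmem, hfst⟩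
  have : (d.items.find? (fun p => p.1 == k)).isSome = true :=
    List.find?_isSome.2 ⟨(k', v), hmem, by simpa using hfst⟩
  rcases Option.isSome_iff_exists.1 this with ⟨⟨k₀, v₀⟩, hfind⟩
  exact ⟨v₀, by simp [PySem.Dict.get?, hfind]⟩

-- the value computed for a single (start, finish) pair agrees
theorem pvBestEq (keypad : List String) (hpre : Pre_build_keypad_specs keypad)
    (s : String) (hs : s ∈ (pvK2P keypad).keys) (hsne : s ≠ " ")
    (f : String) (hf : f ∈ (pvK2P keypad).keys) (hfne : f ≠ " ") :
    pvBestA keypad s f = pvBestB keypad s f := by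
  obtain ⟨p, hp⟩ := pvDictGetMem (pvK2P keypad) s hs
  set g := pvP2K keypad with hg
  rw [pvBestA, pvBestB, hp]
  show pvLoopA g f (4 ^ (g.size + 2)) [((0 : Int), p.1, p.2, [])] none [] =
    pvDeepB g f p (g.size + 1) 0
  have hdisj := hpre s hs hsne f hf hfne p hp
  by_cases hex : ∃ n, ∃ r ∈ pvDirLists n, pvFWb g f p r = true
  · -- some finish walk exists: run the two searches against the minimal length
    set dd := Nat.find hex with hdd
    obtain ⟨r₀, hr₀m, hr₀F⟩ := Nat.find_spec hex
    have hr₀l : r₀.length = dd := ((mem_pvDirLists dd r₀).1 hr₀m).1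
    have hdmin : ∀ r, pvFWb g f p r = true → dd ≤ r.length := by
      intro r hr
      have hdl : pvDirLst r = true := ((pvFWb_iff g f p r).1 hr).1
      exact Nat.find_min' hex ⟨r, (mem_pvDirLists r.length r).2 ⟨rfl, hdl⟩, hr⟩
    have hdex : ∃ w, pvFWb g f p w = true ∧ w.length = dd := ⟨r₀, hr₀F, hr₀l⟩
    have hdsz : dd ≤ g.size := by
      rcases hdisj with hany | hiso
      · rcases List.any_eq_true.1 hany with ⟨q, hq, hqf⟩
        rcases pvReach_walk g g.size [p] q hq with ⟨p₀, hp₀, w, hdl, hok, hend, hlen⟩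
        rcases List.mem_singleton.1 hp₀
        have hfk : g.get? (pvEnd p w) = some f := by
          rw [hend]; exact of_decide_eq_true hqf
        rcases pvTrunc g f w p hdl hok hfk with ⟨w', hdl', hok', hnf', hfk', hlen'⟩
        have : dd ≤ w'.length := Nat.find_min' hex
          ⟨w', (mem_pvDirLists w'.length w').2 ⟨rfl, hdl'⟩,
            (pvFWb_iff g f p w').2 ⟨hdl', hok', hnf', hfk'⟩⟩
        omega
      · cases hw : r₀ with
        | nil =>
            rw [hw] at hr₀l
            simp at hr₀l
            omega
        | cons d rest =>
            exfalso
            rcases (pvFWb_iff g f p r₀).1 hr₀F with ⟨hdl, hok, -, -⟩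
            rw [hw] at hdl hok
            simp only [pvDirLst, List.all_cons, Bool.and_eq_true] at hdl
            simp only [pvOk, Bool.and_eq_true] at hok
            have hdm : d ∈ pvDirsA := by simpa using hdl.1
            exact hiso d hdm hok.1
    exact pvPairMain g f p dd hdmin hdex hdsz
  · -- no finish walk at all: the pair must be isolated and not already at the finish
    have hfin : ¬ g.get? p = some f := by
      intro hc
      exact hex ⟨0, [], by simp [pvDirLists], (pvFWb_iff g f p []).2 ⟨rfl, rfl, rfl, hc⟩⟩
    have hiso : ∀ d ∈ pvDirsA, pvValid g (pvAdd p d) = false := by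
      rcases hdisj with hany | hiso
      · exfalso
        rcases List.any_eq_true.1 hany with ⟨q, hq, hqf⟩
        rcases pvReach_walk g g.size [p] q hq with ⟨p₀, hp₀, w, hdl, hok, hend, -⟩
        rcases List.mem_singleton.1 hp₀
        have hfk : g.get? (pvEnd p w) = some f := by
          rw [hend]; exact of_decide_eq_true hqf
        rcases pvTrunc g f w p hdl hok hfk with ⟨w', hdl', hok', hnf', hfk', -⟩
        exact hex ⟨w'.length, w', (mem_pvDirLists w'.length w').2 ⟨rfl, hdl'⟩,
          (pvFWb_iff g f p w').2 ⟨hdl', hok', hnf', hfk'⟩⟩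
      · intro d hd
        have hh : ¬ pvValid g (pvAdd p d) = true := hiso d hd
        simpa using hh
    exact pvPairIso g f p hfin hiso

-- the two nested dictionary-building folds agree
theorem pvNavEq (keypad : List String) (hpre : Pre_build_keypad_specs keypad) :
    ((pvK2P keypad).keys.foldl (fun d s =>
      (pvK2P keypad).keys.foldl (fun d f =>
        if s ≠ " " ∧ f ≠ " " then d.insert (s, f) (pvBestA keypad s f) else d) d)
      PySem.Dict.empty) =
    (((pvK2P keypad).keys.filter (fun k => k ≠ " ")).foldl (fun d s =>
      ((pvK2P keypad).keys.filter (fun k => k ≠ " ")).foldl (fun d f =>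
        d.insert (s, f) (pvBestB keypad s f)) d)
      PySem.Dict.empty) := by
  set keys := (pvK2P keypad).keys with hkeys
  have hinner : ∀ s ∈ keys, s ≠ " " →
      ∀ d : PySem.Dict (String × String) (List (List (Int × Int))),
      keys.foldl (fun d f =>
        if s ≠ " " ∧ f ≠ " " then d.insert (s, f) (pvBestA keypad s f) else d) d =
      (keys.filter (fun k => k ≠ " ")).foldl (fun d f =>
        d.insert (s, f) (pvBestB keypad s f)) d := by
    intro s hs hsne d
    rw [List.foldl_filter]
    refine (PySem.List.foldl_congr_mem _ _ _ _ ?_)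
    intro acc x hx
    by_cases hxne : x ≠ " "
    · rw [if_pos ⟨hsne, hxne⟩, if_pos (by simpa using hxne),
        pvBestEq keypad hpre s hs hsne x hx hxne]
    · rw [if_neg (by tauto), if_neg (by simpa using hxne)]
  have hzero : ∀ (s : String), s = " " →
      ∀ d : PySem.Dict (String × String) (List (List (Int × Int))),
      keys.foldl (fun d f =>
        if s ≠ " " ∧ f ≠ " " then d.insert (s, f) (pvBestA keypad s f) else d) d = d := by
    intro s hse d
    rw [PySem.List.foldl_congr_mem _ _ (fun d _ => d) _
      (fun acc x _ => if_neg (by tauto))]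
    exact List.foldl_fixed _
  rw [List.foldl_filter]
  refine PySem.List.foldl_congr_mem _ _ _ _ ?_
  intro acc s hs
  by_cases hsne : s ≠ " "
  · rw [if_pos (by simpa using hsne)]
    exact hinner s hs hsne acc
  · rw [if_neg (by simpa using hsne)]
    exact hzero s (by simpa using hsne) acc

theorem pvOuterEq (keypad : List String) (hpre : Pre_build_keypad_specs keypad) :
    build_keypad_specs keypad = build_keypad_specs_alt keypad := by
  show ((pvK2P keypad).keys.foldl (fun d s =>
      (pvK2P keypad).keys.foldl (fun d f =>
        if s ≠ " " ∧ f ≠ " " then d.insert (s, f) (pvBestA keypad s f) else d) d)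
      PySem.Dict.empty).items.map (fun x => (x.1.1, x.1.2, x.2)) =
    (((pvK2P keypad).keys.filter (fun k => k ≠ " ")).foldl (fun d s =>
      ((pvK2P keypad).keys.filter (fun k => k ≠ " ")).foldl (fun d f =>
        d.insert (s, f) (pvBestB keypad s f)) d)
      PySem.Dict.empty).items.map (fun x => (x.1.1, x.1.2, x.2))
  rw [pvNavEq keypad hpre]
-- ===== VERDICT (by name: the statement is the Claim_ definition above) =====
theorem build_keypad_specs_spec : Claim_equal_build_keypad_specs := by
  intro keypad _ hpre
  show build_keypad_specs keypad = build_keypad_specs_alt keypad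
  exact pvOuterEq keypad hpre
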